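-- pv_equiv track=rewrite | github.com/tyler-harpool/verdictum | fix_test_data.py | fix_judge_title_enums
-- ===== SOURCE A (Python) =====
-- def fix_judge_title_enums(content):
--     """Fix judge title enum values to use snake_case."""
--     replacements = {
--         '"DistrictJudge"': '"district_judge"',
--         '"ChiefJudge"': '"chief_judge"',
--         '"SeniorJudge"': '"senior_judge"',
--         '"MagistrateJudge"': '"magistrate_judge"',
--         '"BankruptcyJudge"': '"bankruptcy_judge"',
--         '"VisitingJudge"': '"visiting_judge"',
--     }
--
--     for old, new in replacements.items():
--         content = content.replace(old, new)
--
--     return content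
-- ===== SOURCE B (Python) =====
-- def fix_judge_title_enums(content):
--     """Fix judge title enum values to use snake_case."""
--     snake = {
--         'DistrictJudge': 'district_judge',
--         'ChiefJudge': 'chief_judge',
--         'SeniorJudge': 'senior_judge',
--         'MagistrateJudge': 'magistrate_judge',
--         'BankruptcyJudge': 'bankruptcy_judge',
--         'VisitingJudge': 'visiting_judge',
--     }
--     parts = content.split('"')
--     return '"'.join(p if i == 0 or i == len(parts) - 1 else snake.get(p, p)
--                     for i, p in enumerate(parts))
-- ===== Notes on version B (the rewrite author's own statement) =====
-- stated objective: alternative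
-- what changed: B splits the content on the quote character once and maps each between-quotes piece through the CamelCase->snake_case dict before rejoining, instead of A's six sequential full-string str.replace passes.
-- intended difference: On contents containing a same-enum chain like '"DistrictJudge"DistrictJudge"' sharing a quote, A's non-overlapping replace leaves the middle occurrence CamelCase, while B snake_cases every quoted enum name, which is the intended fix. — e.g. on fix_judge_title_enums("\"DistrictJudge\"DistrictJudge\""): A returns "\"district_judge\"DistrictJudge\"", B returns "\"district_judge\"district_judge\""
import Mathlib
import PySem

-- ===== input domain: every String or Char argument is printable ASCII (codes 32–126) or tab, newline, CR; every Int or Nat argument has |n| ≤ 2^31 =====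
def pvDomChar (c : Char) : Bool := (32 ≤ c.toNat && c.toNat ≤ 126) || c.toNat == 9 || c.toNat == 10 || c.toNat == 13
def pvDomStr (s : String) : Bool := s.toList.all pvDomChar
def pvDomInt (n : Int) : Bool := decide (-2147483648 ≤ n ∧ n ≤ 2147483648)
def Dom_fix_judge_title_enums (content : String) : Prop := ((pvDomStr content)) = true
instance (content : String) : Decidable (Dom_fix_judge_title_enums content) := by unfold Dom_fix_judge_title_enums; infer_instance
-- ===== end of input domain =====

-- B replaces every quoted enum name in one split-on-quote pass instead of A's six sequential
-- str.replace passes; on degenerate same-enum chains sharing a quote the two differ (see D_ below).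

-- ===== PORT A =====
-- the dict literal 'replacements' in insertion order; the loop 'for old, new in replacements.items()'
-- is a foldl of str.replace over the pairs
def fix_judge_title_enums (content : String) : String :=
  let replacements : List (String × String) :=
    [("\"DistrictJudge\"", "\"district_judge\""),
     ("\"ChiefJudge\"", "\"chief_judge\""),
     ("\"SeniorJudge\"", "\"senior_judge\""),
     ("\"MagistrateJudge\"", "\"magistrate_judge\""),
     ("\"BankruptcyJudge\"", "\"bankruptcy_judge\""),
     ("\"VisitingJudge\"", "\"visiting_judge\"")]
  replacements.foldl (fun c on => PySem.Str.replace c on.1 on.2) content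

-- ===== PORT B =====
-- the dict literal 'snake' in insertion order
def altSnake : List (String × String) :=
  [("DistrictJudge", "district_judge"),
   ("ChiefJudge", "chief_judge"),
   ("SeniorJudge", "senior_judge"),
   ("MagistrateJudge", "magistrate_judge"),
   ("BankruptcyJudge", "bankruptcy_judge"),
   ("VisitingJudge", "visiting_judge")]

-- snake.get(p, p): first matching key in the dict, else p itself
def altGet (p : String) : String := ((altSnake.find? (fun kv => kv.1 == p)).map (fun kv => kv.2)).getD p

def fix_judge_title_enums_alt (content : String) : String :=
  -- parts = content.split('"')  (the separator is nonempty, so split? is always some)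
  let parts := (PySem.Str.split? content "\"").getD []
  -- '"'.join(p if i == 0 or i == len(parts) - 1 else snake.get(p, p) for i, p in enumerate(parts))
  PySem.Str.join "\""
    ((PySem.List.enumerate parts).map (fun ip =>
      if ip.1 == 0 || ip.1 == ((parts.length : Int) - 1) then ip.2 else altGet ip.2))

-- ===== PRECONDITION & SPEC =====
-- On contents containing a same-enum chain like "DistrictJudge"DistrictJudge" sharing a quote,
-- A's non-overlapping replace leaves the middle occurrence CamelCase, while B snake_cases every
-- quoted enum name, which is the intended fix.
def dCores : List (List Char) :=
  ["DistrictJudge".toList, "ChiefJudge".toList, "SeniorJudge".toList,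
   "MagistrateJudge".toList, "BankruptcyJudge".toList, "VisitingJudge".toList]

def D_fix_judge_title_enums (content : String) : Prop :=
  ∃ core ∈ dCores,
    PySem.Chars.isIn ('"' :: core ++ '"' :: core ++ ['"']) content.toList = true
instance (content : String) : Decidable (D_fix_judge_title_enums content) := by
  unfold D_fix_judge_title_enums; infer_instance

def Spec_fix_judge_title_enums (content : String) (out : String) : Prop :=
  ¬ D_fix_judge_title_enums content → out = fix_judge_title_enums_alt content
instance (content : String) (out : String) : Decidable (Spec_fix_judge_title_enums content out) := by
  unfold Spec_fix_judge_title_enums; infer_instance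

def pvDiffWitness_fix_judge_title_enums : String := "\"DistrictJudge\"DistrictJudge\""
def pvDiffWitnessOut_fix_judge_title_enums : String × String :=
  ("\"district_judge\"DistrictJudge\"", "\"district_judge\"district_judge\"")

-- ===== CLAIM (what is proved, stated in full; the proofs are below) =====
def Claim_unchanged_fix_judge_title_enums : Prop :=
  ∀ (content : String), Dom_fix_judge_title_enums content →
    Spec_fix_judge_title_enums content (fix_judge_title_enums content)
def Claim_changed_fix_judge_title_enums : Prop :=
  Dom_fix_judge_title_enums (pvDiffWitness_fix_judge_title_enums) ∧
  D_fix_judge_title_enums (pvDiffWitness_fix_judge_title_enums) ∧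
  fix_judge_title_enums (pvDiffWitness_fix_judge_title_enums) = pvDiffWitnessOut_fix_judge_title_enums.1 ∧
  fix_judge_title_enums_alt (pvDiffWitness_fix_judge_title_enums) = pvDiffWitnessOut_fix_judge_title_enums.2 ∧
  pvDiffWitnessOut_fix_judge_title_enums.1 ≠ pvDiffWitnessOut_fix_judge_title_enums.2
def Claim_exact_fix_judge_title_enums : Prop :=
  ∀ (content : String), Dom_fix_judge_title_enums content →
    D_fix_judge_title_enums content →
    fix_judge_title_enums content ≠ fix_judge_title_enums_alt content

-- ===== LEMMAS AND PROOFS =====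

theorem go_nil (old new : List Char) (fuel : Nat) (acc : List Char) :
    PySem.Chars.replace.go old new fuel [] acc = acc.reverse := by
  cases fuel <;> simp [PySem.Chars.replace.go]

theorem go_cons_pos (old new : List Char) (fuel : Nat) (c : Char) (t acc : List Char)
    (h : old.isPrefixOf (c :: t) = true) :
    PySem.Chars.replace.go old new (fuel + 1) (c :: t) acc =
      PySem.Chars.replace.go old new fuel (List.drop old.length (c :: t)) (new.reverse ++ acc) := by
  simp [PySem.Chars.replace.go, h]

theorem go_cons_neg (old new : List Char) (fuel : Nat) (c : Char) (t acc : List Char)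
    (h : ¬ old.isPrefixOf (c :: t) = true) :
    PySem.Chars.replace.go old new (fuel + 1) (c :: t) acc =
      PySem.Chars.replace.go old new fuel t (c :: acc) := by
  simp [PySem.Chars.replace.go, h]

theorem go_acc (old new : List Char) (hold : old ≠ []) :
    ∀ (fuel : Nat) (l acc : List Char), l.length ≤ fuel →
      PySem.Chars.replace.go old new fuel l acc =
        acc.reverse ++ PySem.Chars.replace.go old new fuel l [] := by
  intro fuel
  induction fuel with
  | zero => intro l acc h; simp at h; subst h; simp [go_nil]
  | succ f ih =>
    intro l acc h
    cases l with
    | nil => simp [go_nil]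
    | cons c t =>
      by_cases hp : old.isPrefixOf (c :: t) = true
      · rw [go_cons_pos _ _ _ _ _ _ hp, go_cons_pos _ _ _ _ _ _ hp]
        have hlen : (List.drop old.length (c :: t)).length ≤ f := by
          have : 1 ≤ old.length := by cases old <;> simp_all
          simp at h ⊢; omega
        rw [ih _ _ hlen, ih _ (new.reverse ++ []) hlen]
        simp
      · rw [go_cons_neg _ _ _ _ _ _ hp, go_cons_neg _ _ _ _ _ _ hp]
        have hlen : t.length ≤ f := by simp at h; omega
        rw [ih _ _ hlen, ih _ [c] hlen]
        simp

theorem go_fuel (old new : List Char) (hold : old ≠ []) :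
    ∀ (f1 f2 : Nat) (l acc : List Char), l.length ≤ f1 → l.length ≤ f2 →
      PySem.Chars.replace.go old new f1 l acc = PySem.Chars.replace.go old new f2 l acc := by
  intro f1
  induction f1 with
  | zero => intro f2 l acc h1 h2; simp at h1; subst h1; simp [go_nil]
  | succ f ih =>
    intro f2 l acc h1 h2
    cases l with
    | nil => simp [go_nil]
    | cons c t =>
      cases f2 with
      | zero => simp at h2
      | succ f2' =>
        by_cases hp : old.isPrefixOf (c :: t) = true
        · rw [go_cons_pos _ _ _ _ _ _ hp, go_cons_pos _ _ _ _ _ _ hp]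
          apply ih
          · have : 1 ≤ old.length := by cases old <;> simp_all
            simp at h1 ⊢; omega
          · have : 1 ≤ old.length := by cases old <;> simp_all
            simp at h2 ⊢; omega
        · rw [go_cons_neg _ _ _ _ _ _ hp, go_cons_neg _ _ _ _ _ _ hp]
          apply ih <;> simp at h1 h2 ⊢ <;> omega

theorem replace_nil (old new : List Char) (hold : old ≠ []) :
    PySem.Chars.replace [] old new = [] := by
  have : old.isEmpty = false := by cases old <;> simp_all
  simp [PySem.Chars.replace, this, go_nil]

theorem replace_step (old new : List Char) (hold : old ≠ []) (c : Char) (t : List Char)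
    (h : ¬ old <+: (c :: t)) :
    PySem.Chars.replace (c :: t) old new = c :: PySem.Chars.replace t old new := by
  have he : old.isEmpty = false := by cases old <;> simp_all
  have hp : ¬ old.isPrefixOf (c :: t) = true := by simpa using h
  simp only [PySem.Chars.replace, he, Bool.false_eq_true, if_false, List.length_cons]
  rw [go_cons_neg _ _ _ _ _ _ hp, go_acc _ _ hold _ _ _ (le_refl _)]
  simp

theorem replace_match (old new : List Char) (hold : old ≠ []) (t : List Char) :
    PySem.Chars.replace (old ++ t) old new = new ++ PySem.Chars.replace t old new := by
  have he : old.isEmpty = false := by cases old <;> simp_all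
  obtain ⟨o, o', rfl⟩ : ∃ o o', old = o :: o' := by cases old with
    | nil => simp_all | cons a b => exact ⟨a, b, rfl⟩
  have hp : (o :: o').isPrefixOf (o :: o' ++ t) = true := by
    simp [List.isPrefixOf_iff_prefix]
  simp only [PySem.Chars.replace, he, Bool.false_eq_true, if_false]
  have hlen : ((o :: o') ++ t).length = t.length + (o'.length + 1) := by simp; omega
  rw [show ((o :: o') ++ t) = o :: (o' ++ t) by simp] at hp ⊢
  rw [show (o :: (o' ++ t)).length = (o' ++ t).length + 1 by simp]
  rw [go_cons_pos _ _ _ _ _ _ hp]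
  have hdrop : List.drop (o :: o').length (o :: (o' ++ t)) = t := by
    simpa using List.drop_left (o :: o') t
  rw [hdrop]
  rw [go_fuel _ _ (by simp) ((o' ++ t).length) t.length t _ (by simp) (le_refl _)]
  rw [go_acc _ _ (by simp) _ _ _ (le_refl _)]
  simp


def myT : List (List Char) → List Char
  | [] => []
  | [p] => p
  | p :: ps => p ++ '"' :: myT ps

theorem join_eq_myT (ps : List (List Char)) : PySem.Chars.join ['"'] ps = myT ps := by
  induction ps with
  | nil => simp [PySem.Chars.join, List.intercalate, myT]
  | cons p ps ih =>
    cases ps with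
    | nil => simp [PySem.Chars.join, List.intercalate, myT]
    | cons q l =>
      simp only [PySem.Chars.join, List.intercalate, List.intersperse] at ih ⊢
      simp [myT, ← ih]

def mySplit : List Char → List (List Char)
  | [] => [[]]
  | c :: t => if c = '"' then [] :: mySplit t
              else match mySplit t with
                   | [] => [[c]]
                   | h :: t' => (c :: h) :: t'

theorem mySplit_ne_nil (cs : List Char) : mySplit cs ≠ [] := by
  cases cs with
  | nil => simp [mySplit]
  | cons c t =>
    simp only [mySplit]
    split
    · simp
    · split <;> simp

theorem mySplit_free (cs : List Char) : ∀ p ∈ mySplit cs, '"' ∉ p := by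
  induction cs with
  | nil => simp [mySplit]
  | cons c t ih =>
    simp only [mySplit]
    split
    · intro p hp
      rcases List.mem_cons.mp hp with rfl | h
      · simp
      · exact ih p h
    · rename_i hc
      split
      · rename_i hnil; exact absurd hnil (mySplit_ne_nil t)
      · rename_i h t' hht
        intro p hp
        have hh : '\"' ∉ h := ih h (by rw [hht]; simp)
        rcases List.mem_cons.mp hp with rfl | hmem
        · intro hq
          rcases List.mem_cons.mp hq with hq | hq
          · exact hc hq.symm
          · exact hh hq
        · exact ih p (by rw [hht]; exact List.mem_cons_of_mem _ hmem)

theorem myT_mySplit (cs : List Char) : myT (mySplit cs) = cs := by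
  induction cs with
  | nil => simp [mySplit, myT]
  | cons c t ih =>
    simp only [mySplit]
    split
    · rename_i hc
      subst hc
      obtain ⟨h, t', hht⟩ : ∃ h t', mySplit t = h :: t' := by
        cases hh : mySplit t with
        | nil => exact absurd hh (mySplit_ne_nil t)
        | cons a b => exact ⟨a, b, rfl⟩
      rw [hht] at ih ⊢
      simp [myT, ih]
    · split
      · rename_i hnil; exact absurd hnil (mySplit_ne_nil t)
      · rename_i h t' hht
        rw [hht] at ih
        cases t' with
        | nil => simp_all [myT]
        | cons a b => simp_all [myT]


theorem sgo_nil (sep : List Char) (fuel : Nat) (cur : List Char) (acc : List (List Char)) :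
    PySem.Chars.splitOn.go sep fuel [] cur acc = (cur.reverse :: acc).reverse := by
  cases fuel <;> simp [PySem.Chars.splitOn.go]

theorem sgo_pos (sep : List Char) (fuel : Nat) (c : Char) (t cur : List Char) (acc : List (List Char))
    (h : sep.isPrefixOf (c :: t) = true) :
    PySem.Chars.splitOn.go sep (fuel + 1) (c :: t) cur acc =
      PySem.Chars.splitOn.go sep fuel (List.drop sep.length (c :: t)) [] (cur.reverse :: acc) := by
  simp [PySem.Chars.splitOn.go, h]

theorem sgo_neg (sep : List Char) (fuel : Nat) (c : Char) (t cur : List Char) (acc : List (List Char))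
    (h : ¬ sep.isPrefixOf (c :: t) = true) :
    PySem.Chars.splitOn.go sep (fuel + 1) (c :: t) cur acc =
      PySem.Chars.splitOn.go sep fuel t (c :: cur) acc := by
  simp [PySem.Chars.splitOn.go, h]
def consHead (x : List Char) : List (List Char) → List (List Char)
  | [] => [x]
  | h :: t => (x ++ h) :: t

theorem sgo_spec : ∀ (fuel : Nat) (l cur : List Char) (acc : List (List Char)), l.length ≤ fuel →
    PySem.Chars.splitOn.go ['"'] fuel l cur acc =
      acc.reverse ++ consHead cur.reverse (mySplit l) := by
  intro fuel
  induction fuel with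
  | zero => intro l cur acc h; simp at h; subst h
            simp [sgo_nil, mySplit, consHead]
  | succ f ih =>
    intro l cur acc h
    cases l with
    | nil => simp [sgo_nil, mySplit, consHead]
    | cons c t =>
      by_cases hc : c = '"'
      · subst hc
        have hp : (['"'] : List Char).isPrefixOf ('"' :: t) = true := by
          simp [List.isPrefixOf_iff_prefix]
        rw [sgo_pos _ _ _ _ _ _ hp]
        have : List.drop (['"'] : List Char).length ('"' :: t) = t := by simp
        rw [this, ih _ _ _ (by simp at h ⊢; omega)]
        obtain ⟨hh, t', hht⟩ : ∃ hh t', mySplit t = hh :: t' := by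
          cases hh : mySplit t with
          | nil => exact absurd hh (mySplit_ne_nil t)
          | cons a b => exact ⟨a, b, rfl⟩
        simp [mySplit, hht, consHead]
      · have hp : ¬ (['"'] : List Char).isPrefixOf (c :: t) = true := by
          simp
          exact fun habs => hc habs.symm
        rw [sgo_neg _ _ _ _ _ _ hp, ih _ _ _ (by simp at h ⊢; omega)]
        obtain ⟨hh, t', hht⟩ : ∃ hh t', mySplit t = hh :: t' := by
          cases hh : mySplit t with
          | nil => exact absurd hh (mySplit_ne_nil t)
          | cons a b => exact ⟨a, b, rfl⟩
        simp [mySplit, hht, consHead, hc]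

theorem splitOn_eq_mySplit (cs : List Char) :
    PySem.Chars.splitOn cs ['"'] = mySplit cs := by
  rw [PySem.Chars.splitOn, sgo_spec _ _ _ _ (by omega)]
  obtain ⟨hh, t', hht⟩ : ∃ hh t', mySplit cs = hh :: t' := by
    cases hh : mySplit cs with
    | nil => exact absurd hh (mySplit_ne_nil cs)
    | cons a b => exact ⟨a, b, rfl⟩
  simp [hht, consHead]
-- walking a quote-free segment: the key starts with '"', so no match can start inside u
theorem replace_walk (k new : List Char) (u : List Char) (hu : '"' ∉ u) :
    ∀ rest, PySem.Chars.replace (u ++ rest) ('"' :: k) new = u ++ PySem.Chars.replace rest ('"' :: k) new := by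
  induction u with
  | nil => simp
  | cons c u' ih =>
    intro rest
    have hc : c ≠ '"' := by intro h; exact hu (by simp [h])
    have hnp : ¬ ('"' :: k) <+: (c :: (u' ++ rest)) := by
      intro h
      exact hc (List.cons_prefix_cons.mp h).1.symm
    rw [List.cons_append, replace_step _ _ (by simp) _ _ hnp, ih (by intro h; exact hu (by simp [h]))]
    simp

-- alignment: a quote-free core followed by a quote matches at a quote-free piece iff the piece IS the core
theorem core_align (core : List Char) (hc : '"' ∉ core) :
    ∀ (p : List Char), '"' ∉ p → ∀ rest, (core ++ ['"'] <+: p ++ '"' :: rest) ↔ core = p := by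
  induction core with
  | nil =>
    intro p hp rest
    cases p with
    | nil => simp
    | cons d p' =>
      constructor
      · intro h
        have := (List.cons_prefix_cons.mp h).1
        exact absurd (by simp [← this]) hp
      · intro h; exact absurd h (by simp)
  | cons a core' ih =>
    intro p hp rest
    cases p with
    | nil =>
      constructor
      · intro h
        have := (List.cons_prefix_cons.mp (by simpa using h)).1
        exact absurd (by simp [this]) hc
      · intro h; exact absurd h (by simp)
    | cons d p' =>
      constructor
      · intro h
        obtain ⟨had, htail⟩ := List.cons_prefix_cons.mp (by simpa using h)
        have := (ih (by intro hh; exact hc (by simp [hh])) p' (by intro hh; exact hp (by simp [hh])) rest).mp (by simpa using htail)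
        simp [had, this]
      · intro h
        rw [← h]
        exact ⟨rest, by simp⟩
-- no match can start at or inside a final quote-free piece
theorem core_no_tail (core : List Char) (p : List Char) (hp : '"' ∉ p)
    (h : core ++ ['"'] <+: p) : False := by
  have : '"' ∈ p := h.sublist.mem (by simp)
  exact hp this

def aRepl (core snake : List Char) : List (List Char) → List (List Char)
  | [] => []
  | [p] => [p]
  | p :: r :: ps => if p = core then snake :: r :: aRepl core snake ps
                    else p :: aRepl core snake (r :: ps)

theorem length_aRepl (core snake : List Char) (ps : List (List Char)) :
    (aRepl core snake ps).length = ps.length := by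
  fun_induction aRepl <;> simp_all

theorem aRepl_ne_nil (core snake : List Char) (ps : List (List Char)) (h : ps ≠ []) :
    aRepl core snake ps ≠ [] := by
  intro habs
  have := length_aRepl core snake ps
  rw [habs] at this
  simp at this
  exact h (List.eq_nil_of_length_eq_zero this.symm ▸ rfl)

theorem aRepl_free (core snake : List Char) (hs : '"' ∉ snake) (ps : List (List Char))
    (hps : ∀ p ∈ ps, '"' ∉ p) : ∀ p ∈ aRepl core snake ps, '"' ∉ p := by
  fun_induction aRepl with
  | case1 => simp
  | case2 p => simpa using hps
  | case3 r ps ih =>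
    intro x hx
    rcases List.mem_cons.mp hx with rfl | hx
    · exact hs
    · rcases List.mem_cons.mp hx with rfl | hx
      · exact hps x (by simp)
      · exact ih (fun y hy => hps y (by simp at hy ⊢; tauto)) x hx
  | case4 p r ps hne ih =>
    intro x hx
    rcases List.mem_cons.mp hx with rfl | hx
    · exact hps x (by simp)
    · exact ih (fun y hy => hps y (List.mem_cons_of_mem _ hy)) x hx

-- the key scan on a quoted tail: each between-quote piece equal to the core is replaced and the
-- following piece loses its opening quote (A's non-overlapping scan)
theorem innerC (core snake : List Char) (hcf : '"' ∉ core) (hsf : '"' ∉ snake) :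
    ∀ ps : List (List Char), (∀ p ∈ ps, '"' ∉ p) → ps ≠ [] →
      PySem.Chars.replace ('"' :: myT ps) ('"' :: (core ++ ['"'])) ('"' :: (snake ++ ['"']))
        = '"' :: myT (aRepl core snake ps) := by
  intro ps
  fun_induction aRepl core snake ps with
  | case1 => intro _ h; exact absurd rfl h
  | case2 p =>
    intro hfree _
    have hp : '"' ∉ p := hfree p (by simp)
    have hnp : ¬ ('"' :: (core ++ ['"'])) <+: ('"' :: myT [p]) := by
      intro h
      have h2 := (List.cons_prefix_cons.mp h).2
      exact core_no_tail core p hp (by simpa [myT] using h2)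
    rw [replace_step _ _ (by simp) _ _ hnp]
    have hwp : PySem.Chars.replace (myT [p]) ('"' :: (core ++ ['"'])) ('"' :: (snake ++ ['"'])) = p := by
      have h0 : PySem.Chars.replace ([] : List Char) ('"' :: (core ++ ['"'])) ('"' :: (snake ++ ['"'])) = [] :=
        replace_nil _ _ (by simp)
      have hw := replace_walk (core ++ ['"']) ('"' :: (snake ++ ['"'])) p hp []
      rw [List.append_nil] at hw
      rw [h0] at hw
      simpa [myT] using hw
    rw [hwp]
    simp [myT]
  | case3 r ps ih =>
    intro hfree _
    -- head piece equals the core: the key matches and consumes both quotes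
    have hkey : ('"' :: myT (core :: r :: ps)) = ('"' :: (core ++ ['"'])) ++ myT (r :: ps) := by
      simp [myT]
    rw [hkey, replace_match _ _ (by simp) _]
    have hr : '"' ∉ r := hfree r (by simp)
    cases ps with
    | nil =>
      have h0 : PySem.Chars.replace ([] : List Char) ('"' :: (core ++ ['"'])) ('"' :: (snake ++ ['"'])) = [] :=
        replace_nil _ _ (by simp)
      have hw := replace_walk (core ++ ['"']) ('"' :: (snake ++ ['"'])) r hr []
      rw [List.append_nil] at hw
      rw [h0] at hw
      simp [myT, hw, aRepl]
    | cons s t =>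
      have hmt : myT (r :: s :: t) = r ++ '"' :: myT (s :: t) := by simp [myT]
      rw [hmt, replace_walk (core ++ ['"']) ('"' :: (snake ++ ['"'])) r hr _]
      rw [ih (fun y hy => hfree y (by simp at hy ⊢; tauto)) (by simp)]
      have hne := aRepl_ne_nil core snake (s :: t) (by simp)
      cases har : aRepl core snake (s :: t) with
      | nil => exact absurd har hne
      | cons x y => simp [myT]
  | case4 p r ps hne ih =>
    intro hfree _
    have hp : '"' ∉ p := hfree p (by simp)
    have hnp : ¬ ('"' :: (core ++ ['"'])) <+: ('"' :: myT (p :: r :: ps)) := by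
      intro h
      have h2 := (List.cons_prefix_cons.mp h).2
      rw [show myT (p :: r :: ps) = p ++ '"' :: myT (r :: ps) from by simp [myT]] at h2
      exact hne ((core_align core hcf p hp (myT (r :: ps))).mp h2).symm
    rw [replace_step _ _ (by simp) _ _ hnp]
    rw [show myT (p :: r :: ps) = p ++ '"' :: myT (r :: ps) from by simp [myT]]
    rw [replace_walk (core ++ ['"']) ('"' :: (snake ++ ['"'])) p hp _]
    rw [ih (fun y hy => hfree y (List.mem_cons_of_mem _ hy)) (by simp)]
    have hne2 := aRepl_ne_nil core snake (r :: ps) (by simp)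
    cases har : aRepl core snake (r :: ps) with
    | nil => exact absurd har hne2
    | cons x y => simp [myT]

-- one full str.replace pass in piece form
theorem topKey (core snake : List Char) (hcf : '"' ∉ core) (hsf : '"' ∉ snake)
    (p0 : List Char) (hp0 : '"' ∉ p0) (ps : List (List Char)) (hps : ∀ p ∈ ps, '"' ∉ p) :
    PySem.Chars.replace (myT (p0 :: ps)) ('"' :: (core ++ ['"'])) ('"' :: (snake ++ ['"']))
      = myT (p0 :: aRepl core snake ps) := by
  cases ps with
  | nil =>
    have h0 : PySem.Chars.replace ([] : List Char) ('"' :: (core ++ ['"'])) ('"' :: (snake ++ ['"'])) = [] :=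
      replace_nil _ _ (by simp)
    have hw := replace_walk (core ++ ['"']) ('"' :: (snake ++ ['"'])) p0 hp0 []
    rw [List.append_nil] at hw
    rw [h0] at hw
    simpa [myT, aRepl] using hw
  | cons r t =>
    rw [show myT (p0 :: r :: t) = p0 ++ '"' :: myT (r :: t) from by simp [myT]]
    rw [replace_walk (core ++ ['"']) ('"' :: (snake ++ ['"'])) p0 hp0 _]
    rw [innerC core snake hcf hsf (r :: t) hps (by simp)]
    have hne := aRepl_ne_nil core snake (r :: t) (by simp)
    cases har : aRepl core snake (r :: t) with
    | nil => exact absurd har hne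
    | cons x y => simp [myT]

def pMap (g : List Char → List Char) : List (List Char) → List (List Char)
  | [] => []
  | [p] => [p]
  | p :: ps => g p :: pMap g ps

def NA (core : List Char) : List (List Char) → Prop
  | p :: r :: s :: t => (p ≠ core ∨ r ≠ core) ∧ NA core (r :: s :: t)
  | _ => True

theorem NA_tail (core : List Char) (p : List Char) (l : List (List Char))
    (h : NA core (p :: l)) : NA core l := by
  match l with
  | [] => trivial
  | [a] => trivial
  | a :: b :: t => exact h.2

-- under no same-core adjacency the skipping scan is the pointwise map
theorem aRepl_eq_pMap (core snake : List Char) :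
    ∀ ps : List (List Char), NA core ps →
      aRepl core snake ps = pMap (fun p => if p = core then snake else p) ps := by
  intro ps
  fun_induction aRepl core snake ps with
  | case1 => intro _; rfl
  | case2 p => intro _; rfl
  | case3 r ps ih =>
    intro hna
    cases ps with
    | nil => simp [pMap, aRepl]
    | cons s t =>
      have hr : r ≠ core := by
        rcases hna.1 with h | h
        · exact absurd rfl h
        · exact h
      have := ih (NA_tail core r _ (NA_tail core core _ hna))
      simp [pMap, this, hr]
  | case4 p r ps hne ih =>
    intro hna
    have := ih (NA_tail core p _ hna)
    simp [pMap, this, hne]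

theorem pMap_cons (g : List Char → List Char) (p : List Char) (ps : List (List Char))
    (h : ps ≠ []) : pMap g (p :: ps) = g p :: pMap g ps := by
  cases ps with
  | nil => exact absurd rfl h
  | cons a b => rfl

theorem length_pMap (g : List Char → List Char) (ps : List (List Char)) :
    (pMap g ps).length = ps.length := by
  induction ps with
  | nil => rfl
  | cons p ps ih =>
    cases ps with
    | nil => rfl
    | cons a b =>
      rw [pMap_cons g p _ (by simp)]
      simpa using ih

theorem pMap_ne_nil (g : List Char → List Char) (ps : List (List Char)) (h : ps ≠ []) :
    pMap g ps ≠ [] := by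
  intro habs
  have := length_pMap g ps
  rw [habs] at this
  simp at this
  exact h (List.eq_nil_of_length_eq_zero this.symm ▸ rfl)

theorem pMap_pMap (g h : List Char → List Char) (ps : List (List Char)) :
    pMap g (pMap h ps) = pMap (fun p => g (h p)) ps := by
  induction ps with
  | nil => rfl
  | cons p ps ih =>
    cases ps with
    | nil => rfl
    | cons a b =>
      rw [pMap_cons h p _ (by simp), pMap_cons g _ _ (pMap_ne_nil h _ (by simp)),
          pMap_cons _ p _ (by simp), ih]

theorem pMap_free (g : List Char → List Char) (hg : ∀ p, '"' ∉ p → '"' ∉ g p)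
    (ps : List (List Char)) (hps : ∀ p ∈ ps, '"' ∉ p) : ∀ p ∈ pMap g ps, '"' ∉ p := by
  induction ps with
  | nil => simp [pMap]
  | cons p ps ih =>
    cases ps with
    | nil => simpa [pMap] using hps
    | cons a b =>
      rw [pMap_cons g p _ (by simp)]
      intro x hx
      rcases List.mem_cons.mp hx with rfl | hx
      · exact hg p (hps p (by simp))
      · exact ih (fun y hy => hps y (List.mem_cons_of_mem _ hy)) x hx

-- adjacency for a later core survives an earlier pointwise pass
theorem NA_pMap (core : List Char) (g : List Char → List Char)
    (hg : ∀ x, g x = core → x = core) :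
    ∀ ps : List (List Char), NA core ps → NA core (pMap g ps) := by
  intro ps
  induction ps with
  | nil => intro _; trivial
  | cons p ps ih =>
    intro hna
    cases ps with
    | nil => trivial
    | cons a b =>
      rw [pMap_cons g p _ (by simp)]
      cases b with
      | nil => simp [pMap]; trivial
      | cons s t =>
        have h2 := ih (NA_tail core p _ hna)
        rw [pMap_cons g a _ (by simp)] at h2 ⊢
        have hpair : p ≠ core ∨ a ≠ core := hna.1
        have hh : pMap g (s :: t) ≠ [] := pMap_ne_nil g _ (by simp)
        obtain ⟨x, y, hxy⟩ : ∃ x y, pMap g (s :: t) = x :: y := by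
          cases hq : pMap g (s :: t) with
          | nil => exact absurd hq hh
          | cons x y => exact ⟨x, y, rfl⟩
        rw [hxy] at h2 ⊢
        refine ⟨?_, h2⟩
        rcases hpair with h | h
        · exact Or.inl (fun habs => h (hg _ habs))
        · exact Or.inr (fun habs => h (hg _ habs))

theorem myT_append (Y : List (List Char)) (hY : Y ≠ []) :
    ∀ X : List (List Char), X ≠ [] → myT (X ++ Y) = myT X ++ '"' :: myT Y := by
  intro X
  induction X with
  | nil => intro h; exact absurd rfl h
  | cons x X' ih =>
    intro _
    cases X' with
    | nil =>
      cases Y with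
      | nil => exact absurd rfl hY
      | cons y Y' => simp [myT]
    | cons x2 X'' =>
      have := ih (by simp)
      simp only [List.cons_append] at this ⊢
      rw [show myT (x :: x2 :: (X'' ++ Y)) = x ++ '"' :: myT (x2 :: (X'' ++ Y)) from by simp [myT]]
      rw [show myT (x :: x2 :: X'') = x ++ '"' :: myT (x2 :: X'') from by simp [myT]]
      rw [this]
      simp

theorem NA_extract (core : List Char) :
    ∀ ps : List (List Char), ¬ NA core ps →
      ∃ L s t, ps = L ++ core :: core :: s :: t := by
  intro ps
  induction ps with
  | nil => intro h; exact absurd trivial h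
  | cons p l ih =>
    intro h
    match l, h with
    | [], h => exact absurd trivial h
    | [a], h => exact absurd trivial h
    | a :: b :: t, h =>
      by_cases hpair : p = core ∧ a = core
      · exact ⟨[], b, t, by simp [hpair.1, hpair.2]⟩
      · have hna : ¬ NA core (a :: b :: t) := by
          intro hrec
          exact h ⟨by tauto, hrec⟩
        obtain ⟨L, s, t', ht⟩ := ih hna
        exact ⟨p :: L, s, t', by simp [ht]⟩

def gFor (core snake : List Char) (p : List Char) : List Char := if p = core then snake else p

theorem gFor_pres (core snake c' : List Char) (hne : snake ≠ c') :
    ∀ x, gFor core snake x = c' → x = c' := by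
  intro x
  unfold gFor
  split_ifs with h
  · intro hh; exact absurd hh hne
  · exact fun hh => hh

theorem gFor_free (core snake : List Char) (hs : '"' ∉ snake) (p : List Char) (hp : '"' ∉ p) :
    '"' ∉ gFor core snake p := by
  unfold gFor
  split_ifs <;> assumption

def altGetL (p : List Char) : List Char :=
  if p = "DistrictJudge".toList then "district_judge".toList
  else if p = "ChiefJudge".toList then "chief_judge".toList
  else if p = "SeniorJudge".toList then "senior_judge".toList
  else if p = "MagistrateJudge".toList then "magistrate_judge".toList
  else if p = "BankruptcyJudge".toList then "bankruptcy_judge".toList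
  else if p = "VisitingJudge".toList then "visiting_judge".toList
  else p

theorem altGet_toList (p : List Char) : (altGet (String.ofList p)).toList = altGetL p := by
  have hs : ∀ (s : String), (s == String.ofList p) = true ↔ s.toList = p := by
    intro s
    rw [beq_iff_eq]
    constructor
    · intro h; rw [h, String.toList_ofList]
    · intro h; rw [← h, String.ofList_toList]
  by_cases h1 : p = "DistrictJudge".toList
  · subst h1; decide
  by_cases h2 : p = "ChiefJudge".toList
  · subst h2; decide
  by_cases h3 : p = "SeniorJudge".toList
  · subst h3; decide
  by_cases h4 : p = "MagistrateJudge".toList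
  · subst h4; decide
  by_cases h5 : p = "BankruptcyJudge".toList
  · subst h5; decide
  by_cases h6 : p = "VisitingJudge".toList
  · subst h6; decide
  have hfind : altSnake.find? (fun kv => kv.1 == String.ofList p) = none := by
    rw [List.find?_eq_none]
    intro kv hkv
    simp only [altSnake, List.mem_cons, List.not_mem_nil, or_false] at hkv
    rcases hkv with rfl | rfl | rfl | rfl | rfl | rfl
    · exact fun habs => h1 ((hs _).mp habs).symm
    · exact fun habs => h2 ((hs _).mp habs).symm
    · exact fun habs => h3 ((hs _).mp habs).symm
    · exact fun habs => h4 ((hs _).mp habs).symm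
    · exact fun habs => h5 ((hs _).mp habs).symm
    · exact fun habs => h6 ((hs _).mp habs).symm
  unfold altGet altGetL
  rw [hfind, if_neg h1, if_neg h2, if_neg h3, if_neg h4, if_neg h5, if_neg h6]
  simp [String.toList_ofList]

theorem enum_map_of {A B : Type} (f : A → B) (xs : List A) :
    ∀ s : Int, PySem.List.enumerate (xs.map f) s
      = (PySem.List.enumerate xs s).map (fun ia => (ia.1, f ia.2)) := by
  induction xs with
  | nil => intro s; simp [PySem.List.enumerate]
  | cons x xs ih => intro s; simp [PySem.List.enumerate_cons, ih]

theorem enumTail (n : Int) :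
    ∀ (ps : List (List Char)) (s : Int), 1 ≤ s → s + ps.length = n →
      (PySem.List.enumerate ps s).map
          (fun ip => if ip.1 == 0 || ip.1 == n - 1 then ip.2 else altGetL ip.2)
        = pMap altGetL ps := by
  intro ps
  induction ps with
  | nil => intro s _ _; simp [PySem.List.enumerate, pMap]
  | cons p ps ih =>
    intro s hs hn
    rw [PySem.List.enumerate_cons, List.map_cons]
    have hz : (s == (0 : Int)) = false := by simp; omega
    cases ps with
    | nil =>
      have hl : (s == n - 1) = true := by simp at hn ⊢; omega
      simp only [hz, hl, Bool.false_or, if_true]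
      simp [PySem.List.enumerate, pMap]
    | cons a b =>
      have hl : (s == n - 1) = false := by
        simp at hn ⊢
        omega
      rw [pMap_cons altGetL p (a :: b) (by simp)]
      simp only [hz, hl, Bool.or_self, Bool.false_eq_true, if_false]
      rw [ih (s + 1) (by omega) (by simp at hn ⊢; omega)]

theorem enumTop (p0 : List Char) (ps : List (List Char)) :
    (PySem.List.enumerate (p0 :: ps) 0).map
        (fun ip => if ip.1 == 0 || ip.1 == ((p0 :: ps).length : Int) - 1 then ip.2 else altGetL ip.2)
      = p0 :: pMap altGetL ps := by
  rw [PySem.List.enumerate_cons, List.map_cons]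
  simp only [show ((0 : Int) == 0) = true from rfl, Bool.true_or, if_true]
  cases ps with
  | nil => simp [PySem.List.enumerate, pMap]
  | cons a b =>
    simp only [zero_add]
    rw [enumTail (((p0 :: a :: b).length : Int)) (a :: b) 1 (by omega) (by simp [List.length_cons]; try omega)]

-- B in piece form
theorem Bside (content : String) (p0 : List Char) (ps : List (List Char))
    (hsp : mySplit content.toList = p0 :: ps) :
    fix_judge_title_enums_alt content = String.ofList (myT (p0 :: pMap altGetL ps)) := by
  unfold fix_judge_title_enums_alt
  have hsep : ("\"" : String).toList = ['"'] := by decide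
  have hsplit : PySem.Str.split? content "\"" = some ((p0 :: ps).map String.ofList) := by
    unfold PySem.Str.split?
    rw [show PySem.Chars.split? content.toList ("\"" : String).toList
          = some (PySem.Chars.splitOn content.toList ['"']) from by rw [hsep]; simp [PySem.Chars.split?]]
    rw [splitOn_eq_mySplit, hsp]
    rfl
  rw [hsplit]
  simp only [Option.getD_some]
  rw [enum_map_of]
  rw [List.map_map]
  unfold PySem.Str.join
  congr 1
  rw [hsep, List.map_map, join_eq_myT, ← enumTop p0 ps]
  congr 1
  apply List.map_congr_left
  intro x _
  simp only [Function.comp, List.length_map]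
  split
  · exact String.toList_ofList
  · exact altGet_toList x.2

def repC (cs core snake : List Char) : List Char :=
  PySem.Chars.replace cs ('"' :: (core ++ ['"'])) ('"' :: (snake ++ ['"']))

theorem aRepl_eq_pMap' (core snake : List Char) (ps : List (List Char)) (h : NA core ps) :
    aRepl core snake ps = pMap (gFor core snake) ps := aRepl_eq_pMap core snake ps h

theorem stepKey (core snake : List Char) (hcf : '"' ∉ core) (hsf : '"' ∉ snake)
    (p0 : List Char) (hp0 : '"' ∉ p0) (ps : List (List Char)) (hps : ∀ p ∈ ps, '"' ∉ p)
    (hna : NA core ps) :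
    repC (myT (p0 :: ps)) core snake = myT (p0 :: pMap (gFor core snake) ps) := by
  unfold repC
  rw [topKey core snake hcf hsf p0 hp0 ps hps, aRepl_eq_pMap' core snake ps hna]

theorem comp_eq (p : List Char) :
    gFor "VisitingJudge".toList "visiting_judge".toList
      (gFor "BankruptcyJudge".toList "bankruptcy_judge".toList
        (gFor "MagistrateJudge".toList "magistrate_judge".toList
          (gFor "SeniorJudge".toList "senior_judge".toList
            (gFor "ChiefJudge".toList "chief_judge".toList
              (gFor "DistrictJudge".toList "district_judge".toList p))))) = altGetL p := by
  by_cases h1 : p = "DistrictJudge".toList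
  · subst h1; decide
  by_cases h2 : p = "ChiefJudge".toList
  · subst h2; decide
  by_cases h3 : p = "SeniorJudge".toList
  · subst h3; decide
  by_cases h4 : p = "MagistrateJudge".toList
  · subst h4; decide
  by_cases h5 : p = "BankruptcyJudge".toList
  · subst h5; decide
  by_cases h6 : p = "VisitingJudge".toList
  · subst h6; decide
  simp only [gFor, altGetL, if_neg h1, if_neg h2, if_neg h3, if_neg h4, if_neg h5, if_neg h6]

theorem Aside (p0 : List Char) (hp0 : '"' ∉ p0) (ps : List (List Char))
    (hfree : ∀ p ∈ ps, '"' ∉ p) (hna : ∀ core ∈ dCores, NA core ps) :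
    repC (repC (repC (repC (repC (repC (myT (p0 :: ps)) "DistrictJudge".toList "district_judge".toList) "ChiefJudge".toList "chief_judge".toList) "SeniorJudge".toList "senior_judge".toList) "MagistrateJudge".toList "magistrate_judge".toList) "BankruptcyJudge".toList "bankruptcy_judge".toList) "VisitingJudge".toList "visiting_judge".toList
      = myT (p0 :: pMap altGetL ps) := by
  rw [stepKey "DistrictJudge".toList "district_judge".toList (by decide) (by decide) p0 hp0 (ps) hfree (hna "DistrictJudge".toList (by simp [dCores]))]
  have free1 : ∀ p ∈ pMap (gFor "DistrictJudge".toList "district_judge".toList) (ps), '"' ∉ p := pMap_free (gFor "DistrictJudge".toList "district_judge".toList) (gFor_free "DistrictJudge".toList "district_judge".toList (by decide)) (ps) hfree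
  have na1_1 : NA "ChiefJudge".toList (pMap (gFor "DistrictJudge".toList "district_judge".toList) (ps)) := NA_pMap "ChiefJudge".toList (gFor "DistrictJudge".toList "district_judge".toList) (gFor_pres "DistrictJudge".toList "district_judge".toList "ChiefJudge".toList (by decide)) (ps) (hna "ChiefJudge".toList (by simp [dCores]))
  have na1_2 : NA "SeniorJudge".toList (pMap (gFor "DistrictJudge".toList "district_judge".toList) (ps)) := NA_pMap "SeniorJudge".toList (gFor "DistrictJudge".toList "district_judge".toList) (gFor_pres "DistrictJudge".toList "district_judge".toList "SeniorJudge".toList (by decide)) (ps) (hna "SeniorJudge".toList (by simp [dCores]))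
  have na1_3 : NA "MagistrateJudge".toList (pMap (gFor "DistrictJudge".toList "district_judge".toList) (ps)) := NA_pMap "MagistrateJudge".toList (gFor "DistrictJudge".toList "district_judge".toList) (gFor_pres "DistrictJudge".toList "district_judge".toList "MagistrateJudge".toList (by decide)) (ps) (hna "MagistrateJudge".toList (by simp [dCores]))
  have na1_4 : NA "BankruptcyJudge".toList (pMap (gFor "DistrictJudge".toList "district_judge".toList) (ps)) := NA_pMap "BankruptcyJudge".toList (gFor "DistrictJudge".toList "district_judge".toList) (gFor_pres "DistrictJudge".toList "district_judge".toList "BankruptcyJudge".toList (by decide)) (ps) (hna "BankruptcyJudge".toList (by simp [dCores]))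
  have na1_5 : NA "VisitingJudge".toList (pMap (gFor "DistrictJudge".toList "district_judge".toList) (ps)) := NA_pMap "VisitingJudge".toList (gFor "DistrictJudge".toList "district_judge".toList) (gFor_pres "DistrictJudge".toList "district_judge".toList "VisitingJudge".toList (by decide)) (ps) (hna "VisitingJudge".toList (by simp [dCores]))
  rw [stepKey "ChiefJudge".toList "chief_judge".toList (by decide) (by decide) p0 hp0 (pMap (gFor "DistrictJudge".toList "district_judge".toList) (ps)) free1 na1_1]
  have free2 : ∀ p ∈ pMap (gFor "ChiefJudge".toList "chief_judge".toList) (pMap (gFor "DistrictJudge".toList "district_judge".toList) (ps)), '"' ∉ p := pMap_free (gFor "ChiefJudge".toList "chief_judge".toList) (gFor_free "ChiefJudge".toList "chief_judge".toList (by decide)) (pMap (gFor "DistrictJudge".toList "district_judge".toList) (ps)) free1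
  have na2_2 : NA "SeniorJudge".toList (pMap (gFor "ChiefJudge".toList "chief_judge".toList) (pMap (gFor "DistrictJudge".toList "district_judge".toList) (ps))) := NA_pMap "SeniorJudge".toList (gFor "ChiefJudge".toList "chief_judge".toList) (gFor_pres "ChiefJudge".toList "chief_judge".toList "SeniorJudge".toList (by decide)) (pMap (gFor "DistrictJudge".toList "district_judge".toList) (ps)) na1_2
  have na2_3 : NA "MagistrateJudge".toList (pMap (gFor "ChiefJudge".toList "chief_judge".toList) (pMap (gFor "DistrictJudge".toList "district_judge".toList) (ps))) := NA_pMap "MagistrateJudge".toList (gFor "ChiefJudge".toList "chief_judge".toList) (gFor_pres "ChiefJudge".toList "chief_judge".toList "MagistrateJudge".toList (by decide)) (pMap (gFor "DistrictJudge".toList "district_judge".toList) (ps)) na1_3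
  have na2_4 : NA "BankruptcyJudge".toList (pMap (gFor "ChiefJudge".toList "chief_judge".toList) (pMap (gFor "DistrictJudge".toList "district_judge".toList) (ps))) := NA_pMap "BankruptcyJudge".toList (gFor "ChiefJudge".toList "chief_judge".toList) (gFor_pres "ChiefJudge".toList "chief_judge".toList "BankruptcyJudge".toList (by decide)) (pMap (gFor "DistrictJudge".toList "district_judge".toList) (ps)) na1_4
  have na2_5 : NA "VisitingJudge".toList (pMap (gFor "ChiefJudge".toList "chief_judge".toList) (pMap (gFor "DistrictJudge".toList "district_judge".toList) (ps))) := NA_pMap "VisitingJudge".toList (gFor "ChiefJudge".toList "chief_judge".toList) (gFor_pres "ChiefJudge".toList "chief_judge".toList "VisitingJudge".toList (by decide)) (pMap (gFor "DistrictJudge".toList "district_judge".toList) (ps)) na1_5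
  rw [stepKey "SeniorJudge".toList "senior_judge".toList (by decide) (by decide) p0 hp0 (pMap (gFor "ChiefJudge".toList "chief_judge".toList) (pMap (gFor "DistrictJudge".toList "district_judge".toList) (ps))) free2 na2_2]
  have free3 : ∀ p ∈ pMap (gFor "SeniorJudge".toList "senior_judge".toList) (pMap (gFor "ChiefJudge".toList "chief_judge".toList) (pMap (gFor "DistrictJudge".toList "district_judge".toList) (ps))), '"' ∉ p := pMap_free (gFor "SeniorJudge".toList "senior_judge".toList) (gFor_free "SeniorJudge".toList "senior_judge".toList (by decide)) (pMap (gFor "ChiefJudge".toList "chief_judge".toList) (pMap (gFor "DistrictJudge".toList "district_judge".toList) (ps))) free2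
  have na3_3 : NA "MagistrateJudge".toList (pMap (gFor "SeniorJudge".toList "senior_judge".toList) (pMap (gFor "ChiefJudge".toList "chief_judge".toList) (pMap (gFor "DistrictJudge".toList "district_judge".toList) (ps)))) := NA_pMap "MagistrateJudge".toList (gFor "SeniorJudge".toList "senior_judge".toList) (gFor_pres "SeniorJudge".toList "senior_judge".toList "MagistrateJudge".toList (by decide)) (pMap (gFor "ChiefJudge".toList "chief_judge".toList) (pMap (gFor "DistrictJudge".toList "district_judge".toList) (ps))) na2_3
  have na3_4 : NA "BankruptcyJudge".toList (pMap (gFor "SeniorJudge".toList "senior_judge".toList) (pMap (gFor "ChiefJudge".toList "chief_judge".toList) (pMap (gFor "DistrictJudge".toList "district_judge".toList) (ps)))) := NA_pMap "BankruptcyJudge".toList (gFor "SeniorJudge".toList "senior_judge".toList) (gFor_pres "SeniorJudge".toList "senior_judge".toList "BankruptcyJudge".toList (by decide)) (pMap (gFor "ChiefJudge".toList "chief_judge".toList) (pMap (gFor "DistrictJudge".toList "district_judge".toList) (ps))) na2_4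
  have na3_5 : NA "VisitingJudge".toList (pMap (gFor "SeniorJudge".toList "senior_judge".toList) (pMap (gFor "ChiefJudge".toList "chief_judge".toList) (pMap (gFor "DistrictJudge".toList "district_judge".toList) (ps)))) := NA_pMap "VisitingJudge".toList (gFor "SeniorJudge".toList "senior_judge".toList) (gFor_pres "SeniorJudge".toList "senior_judge".toList "VisitingJudge".toList (by decide)) (pMap (gFor "ChiefJudge".toList "chief_judge".toList) (pMap (gFor "DistrictJudge".toList "district_judge".toList) (ps))) na2_5
  rw [stepKey "MagistrateJudge".toList "magistrate_judge".toList (by decide) (by decide) p0 hp0 (pMap (gFor "SeniorJudge".toList "senior_judge".toList) (pMap (gFor "ChiefJudge".toList "chief_judge".toList) (pMap (gFor "DistrictJudge".toList "district_judge".toList) (ps)))) free3 na3_3]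
  have free4 : ∀ p ∈ pMap (gFor "MagistrateJudge".toList "magistrate_judge".toList) (pMap (gFor "SeniorJudge".toList "senior_judge".toList) (pMap (gFor "ChiefJudge".toList "chief_judge".toList) (pMap (gFor "DistrictJudge".toList "district_judge".toList) (ps)))), '"' ∉ p := pMap_free (gFor "MagistrateJudge".toList "magistrate_judge".toList) (gFor_free "MagistrateJudge".toList "magistrate_judge".toList (by decide)) (pMap (gFor "SeniorJudge".toList "senior_judge".toList) (pMap (gFor "ChiefJudge".toList "chief_judge".toList) (pMap (gFor "DistrictJudge".toList "district_judge".toList) (ps)))) free3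
  have na4_4 : NA "BankruptcyJudge".toList (pMap (gFor "MagistrateJudge".toList "magistrate_judge".toList) (pMap (gFor "SeniorJudge".toList "senior_judge".toList) (pMap (gFor "ChiefJudge".toList "chief_judge".toList) (pMap (gFor "DistrictJudge".toList "district_judge".toList) (ps))))) := NA_pMap "BankruptcyJudge".toList (gFor "MagistrateJudge".toList "magistrate_judge".toList) (gFor_pres "MagistrateJudge".toList "magistrate_judge".toList "BankruptcyJudge".toList (by decide)) (pMap (gFor "SeniorJudge".toList "senior_judge".toList) (pMap (gFor "ChiefJudge".toList "chief_judge".toList) (pMap (gFor "DistrictJudge".toList "district_judge".toList) (ps)))) na3_4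
  have na4_5 : NA "VisitingJudge".toList (pMap (gFor "MagistrateJudge".toList "magistrate_judge".toList) (pMap (gFor "SeniorJudge".toList "senior_judge".toList) (pMap (gFor "ChiefJudge".toList "chief_judge".toList) (pMap (gFor "DistrictJudge".toList "district_judge".toList) (ps))))) := NA_pMap "VisitingJudge".toList (gFor "MagistrateJudge".toList "magistrate_judge".toList) (gFor_pres "MagistrateJudge".toList "magistrate_judge".toList "VisitingJudge".toList (by decide)) (pMap (gFor "SeniorJudge".toList "senior_judge".toList) (pMap (gFor "ChiefJudge".toList "chief_judge".toList) (pMap (gFor "DistrictJudge".toList "district_judge".toList) (ps)))) na3_5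
  rw [stepKey "BankruptcyJudge".toList "bankruptcy_judge".toList (by decide) (by decide) p0 hp0 (pMap (gFor "MagistrateJudge".toList "magistrate_judge".toList) (pMap (gFor "SeniorJudge".toList "senior_judge".toList) (pMap (gFor "ChiefJudge".toList "chief_judge".toList) (pMap (gFor "DistrictJudge".toList "district_judge".toList) (ps))))) free4 na4_4]
  have free5 : ∀ p ∈ pMap (gFor "BankruptcyJudge".toList "bankruptcy_judge".toList) (pMap (gFor "MagistrateJudge".toList "magistrate_judge".toList) (pMap (gFor "SeniorJudge".toList "senior_judge".toList) (pMap (gFor "ChiefJudge".toList "chief_judge".toList) (pMap (gFor "DistrictJudge".toList "district_judge".toList) (ps))))), '"' ∉ p := pMap_free (gFor "BankruptcyJudge".toList "bankruptcy_judge".toList) (gFor_free "BankruptcyJudge".toList "bankruptcy_judge".toList (by decide)) (pMap (gFor "MagistrateJudge".toList "magistrate_judge".toList) (pMap (gFor "SeniorJudge".toList "senior_judge".toList) (pMap (gFor "ChiefJudge".toList "chief_judge".toList) (pMap (gFor "DistrictJudge".toList "district_judge".toList) (ps))))) free4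
  have na5_5 : NA "VisitingJudge".toList (pMap (gFor "BankruptcyJudge".toList "bankruptcy_judge".toList) (pMap (gFor "MagistrateJudge".toList "magistrate_judge".toList) (pMap (gFor "SeniorJudge".toList "senior_judge".toList) (pMap (gFor "ChiefJudge".toList "chief_judge".toList) (pMap (gFor "DistrictJudge".toList "district_judge".toList) (ps)))))) := NA_pMap "VisitingJudge".toList (gFor "BankruptcyJudge".toList "bankruptcy_judge".toList) (gFor_pres "BankruptcyJudge".toList "bankruptcy_judge".toList "VisitingJudge".toList (by decide)) (pMap (gFor "MagistrateJudge".toList "magistrate_judge".toList) (pMap (gFor "SeniorJudge".toList "senior_judge".toList) (pMap (gFor "ChiefJudge".toList "chief_judge".toList) (pMap (gFor "DistrictJudge".toList "district_judge".toList) (ps))))) na4_5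
  rw [stepKey "VisitingJudge".toList "visiting_judge".toList (by decide) (by decide) p0 hp0 (pMap (gFor "BankruptcyJudge".toList "bankruptcy_judge".toList) (pMap (gFor "MagistrateJudge".toList "magistrate_judge".toList) (pMap (gFor "SeniorJudge".toList "senior_judge".toList) (pMap (gFor "ChiefJudge".toList "chief_judge".toList) (pMap (gFor "DistrictJudge".toList "district_judge".toList) (ps)))))) free5 na5_5]
  have free6 : ∀ p ∈ pMap (gFor "VisitingJudge".toList "visiting_judge".toList) (pMap (gFor "BankruptcyJudge".toList "bankruptcy_judge".toList) (pMap (gFor "MagistrateJudge".toList "magistrate_judge".toList) (pMap (gFor "SeniorJudge".toList "senior_judge".toList) (pMap (gFor "ChiefJudge".toList "chief_judge".toList) (pMap (gFor "DistrictJudge".toList "district_judge".toList) (ps)))))), '"' ∉ p := pMap_free (gFor "VisitingJudge".toList "visiting_judge".toList) (gFor_free "VisitingJudge".toList "visiting_judge".toList (by decide)) (pMap (gFor "BankruptcyJudge".toList "bankruptcy_judge".toList) (pMap (gFor "MagistrateJudge".toList "magistrate_judge".toList) (pMap (gFor "SeniorJudge".toList "senior_judge".toList) (pMap (gFor "ChiefJudge".toList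 "chief_judge".toList) (pMap (gFor "DistrictJudge".toList "district_judge".toList) (ps)))))) free5
  rw [pMap_pMap, pMap_pMap, pMap_pMap, pMap_pMap, pMap_pMap]
  congr 1
  rw [show (fun p => gFor "VisitingJudge".toList "visiting_judge".toList (gFor "BankruptcyJudge".toList "bankruptcy_judge".toList (gFor "MagistrateJudge".toList "magistrate_judge".toList (gFor "SeniorJudge".toList "senior_judge".toList (gFor "ChiefJudge".toList "chief_judge".toList (gFor "DistrictJudge".toList "district_judge".toList (p))))))) = altGetL from funext comp_eq]

theorem NA_of_notD (content : String) (p0 : List Char) (ps : List (List Char))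
    (hsp : mySplit content.toList = p0 :: ps)
    (hnd : ¬ D_fix_judge_title_enums content) :
    ∀ core ∈ dCores, NA core ps := by
  intro core hc
  by_contra hna
  obtain ⟨L, s, t, hsplit⟩ := NA_extract core ps hna
  apply hnd
  refine ⟨core, hc, ?_⟩
  rw [PySem.Chars.isIn_iff_infix]
  rw [← myT_mySplit content.toList, hsp, hsplit]
  rw [show p0 :: (L ++ core :: core :: s :: t) = (p0 :: L) ++ (core :: core :: s :: t) from by simp]
  rw [myT_append _ (by simp) _ (by simp)]
  exact ⟨myT (p0 :: L), myT (s :: t), by simp [myT]⟩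

-- splitting an equality at the first quote
theorem head_cancel (x : List Char) (hx : '"' ∉ x) :
    ∀ (a u w : List Char), x ++ '"' :: u = a ++ '"' :: w →
      ∃ a', a = x ++ a' ∧ '"' :: u = a' ++ '"' :: w := by
  induction x with
  | nil => intro a u w h; exact ⟨a, by simp, h⟩
  | cons c x' ih =>
    intro a u w h
    cases a with
    | nil =>
      simp only [List.nil_append] at h
      have : c = '"' := (List.cons.injEq _ _ _ _ ▸ h).1
      exact absurd (by simp [this]) hx
    | cons d a'' =>
      simp only [List.cons_append] at h
      have hcd : c = d := (List.cons.injEq _ _ _ _ ▸ h).1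
      have htl := (List.cons.injEq _ _ _ _ ▸ h).2
      obtain ⟨a', ha, hu⟩ := ih (by intro hh; exact hx (by simp [hh])) a'' u w htl
      exact ⟨a', by simp [ha, hcd], hu⟩

theorem qfree_eq (x : List Char) (hx : '"' ∉ x) :
    ∀ (y u v : List Char), '"' ∉ y → x ++ '"' :: u = y ++ '"' :: v → x = y ∧ u = v := by
  induction x with
  | nil =>
    intro y u v hy h
    cases y with
    | nil => simpa using h
    | cons d y' =>
      simp only [List.nil_append, List.cons_append] at h
      have : '"' = d := (List.cons.injEq _ _ _ _ ▸ h).1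
      exact absurd (by simp [← this]) hy
  | cons c x' ih =>
    intro y u v hy h
    cases y with
    | nil =>
      simp only [List.cons_append, List.nil_append] at h
      have : c = '"' := (List.cons.injEq _ _ _ _ ▸ h).1
      exact absurd (by simp [this]) hx
    | cons d y' =>
      simp only [List.cons_append] at h
      have hcd : c = d := (List.cons.injEq _ _ _ _ ▸ h).1
      have htl := (List.cons.injEq _ _ _ _ ▸ h).2
      obtain ⟨h1, h2⟩ := ih (by intro hh; exact hx (by simp [hh])) y' u v
        (by intro hh; exact hy (by simp [hh])) htl
      exact ⟨by simp [hcd, h1], h2⟩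

theorem myT_inj : ∀ (X Y : List (List Char)), (∀ p ∈ X, '"' ∉ p) → (∀ p ∈ Y, '"' ∉ p) →
    X.length = Y.length → myT X = myT Y → X = Y := by
  intro X
  induction X with
  | nil => intro Y _ _ hlen _; cases Y with
    | nil => rfl
    | cons a b => simp at hlen
  | cons x X' ih =>
    intro Y hX hY hlen hT
    cases Y with
    | nil => simp at hlen
    | cons y Y' =>
      cases X' with
      | nil =>
        cases Y' with
        | nil => simpa [myT] using hT
        | cons b Y'' => simp at hlen
      | cons x2 X'' =>
        cases Y' with
        | nil => simp at hlen
        | cons y2 Y'' =>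
          rw [show myT (x :: x2 :: X'') = x ++ '"' :: myT (x2 :: X'') from by simp [myT],
              show myT (y :: y2 :: Y'') = y ++ '"' :: myT (y2 :: Y'') from by simp [myT]] at hT
          obtain ⟨hxy, hrest⟩ := qfree_eq x (hX x (by simp)) y (myT (x2 :: X'')) (myT (y2 :: Y''))
            (hY y (by simp)) hT
          have := ih (y2 :: Y'') (fun p hp => hX p (List.mem_cons_of_mem _ hp))
            (fun p hp => hY p (List.mem_cons_of_mem _ hp)) (by simpa using hlen) hrest
          rw [hxy, this]

theorem pat_split (core : List Char) (hcf : '"' ∉ core) :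
    ∀ pieces : List (List Char), (∀ p ∈ pieces, '"' ∉ p) →
      ('"' :: (core ++ '"' :: (core ++ ['"']))) <:+: myT pieces →
      ∃ L rest, pieces = L ++ core :: core :: rest ∧ L ≠ [] ∧ rest ≠ [] := by
  intro pieces
  induction pieces with
  | nil =>
    intro _ hinf
    obtain ⟨a, b, hab⟩ := hinf
    simp [myT] at hab
  | cons p rest ih =>
    intro hfree hinf
    cases rest with
    | nil =>
      obtain ⟨a, b, hab⟩ := hinf
      have : '"' ∈ myT [p] := by rw [← hab]; simp
      exact absurd (by simpa [myT] using this) (hfree p (by simp))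
    | cons r rest' =>
      obtain ⟨a, b, hab⟩ := hinf
      rw [show myT (p :: r :: rest') = p ++ '"' :: myT (r :: rest') from by simp [myT]] at hab
      have heq0 : p ++ '"' :: myT (r :: rest')
          = a ++ '"' :: ((core ++ '"' :: (core ++ ['"'])) ++ b) := by
        rw [← hab]; simp
      obtain ⟨a', ha, heq⟩ := head_cancel p (hfree p (by simp)) a
        (myT (r :: rest')) ((core ++ '"' :: (core ++ ['"'])) ++ b) heq0
      cases a' with
      | cons qc a'' =>
        -- occurrence starts strictly after the first separator: recurse into the tail
        have htl : myT (r :: rest') = a'' ++ ('"' :: (core ++ '"' :: (core ++ ['"']))) ++ b := by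
          have h2 := ((List.cons.injEq _ _ _ _).mp heq).2
          rw [h2]; simp
        obtain ⟨L', r', hsplit, hL', hr'⟩ := ih (fun q hq => hfree q (List.mem_cons_of_mem _ hq))
          ⟨a'', b, htl.symm⟩
        exact ⟨p :: L', r', by simp [hsplit], by simp, hr'⟩
      | nil =>
        -- the occurrence starts at the first separator: the next two pieces are the core
        have hpre : myT (r :: rest') = core ++ '"' :: ((core ++ ['"']) ++ b) := by
          have := ((List.cons.injEq _ _ _ _).mp heq).2
          simp only [List.nil_append] at this
          rw [this]
          simp
        cases rest' with
        | nil =>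
          have : '"' ∈ myT [r] := by rw [hpre]; simp
          exact absurd (by simpa [myT] using this) (hfree r (by simp))
        | cons r2 rest'' =>
          rw [show myT (r :: r2 :: rest'') = r ++ '"' :: myT (r2 :: rest'') from by simp [myT]] at hpre
          obtain ⟨hr_eq, hX⟩ := qfree_eq core hcf r ((core ++ ['"']) ++ b) (myT (r2 :: rest''))
            (hfree r (by simp)) hpre.symm
          cases rest'' with
          | nil =>
            have : '"' ∈ myT [r2] := by rw [← hX]; simp
            exact absurd (by simpa [myT] using this) (hfree r2 (by simp))
          | cons r3 rest3 =>
            rw [show myT (r2 :: r3 :: rest3) = r2 ++ '"' :: myT (r3 :: rest3) from by simp [myT]] at hX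
            rw [show (core ++ ['"']) ++ b = core ++ '"' :: b from by simp] at hX
            obtain ⟨hr2_eq, _⟩ := qfree_eq core hcf r2 b (myT (r3 :: rest3))
              (hfree r2 (by simp)) hX
            exact ⟨[p], r3 :: rest3, by simp [← hr_eq, ← hr2_eq], by simp, by simp⟩

-- positions other than a replaced piece are untouched
theorem aRepl_get (core snake : List Char) :
    ∀ (ps : List (List Char)) (j : Nat),
      (aRepl core snake ps)[j]? = ps[j]? ∨
        (ps[j]? = some core ∧ (aRepl core snake ps)[j]? = some snake) := by
  intro ps
  fun_induction aRepl core snake ps with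
  | case1 => intro j; left; rfl
  | case2 p => intro j; left; rfl
  | case3 r ps ih =>
    intro j
    match j with
    | 0 => right; exact ⟨rfl, rfl⟩
    | 1 => left; rfl
    | (m + 2) =>
      rcases ih m with h | h
      · left; simpa using h
      · right; simpa using h
  | case4 p r ps hne ih =>
    intro j
    match j with
    | 0 => left; rfl
    | (m + 1) =>
      rcases ih m with h | h
      · left; simpa using h
      · right; simpa using h

-- a same-core adjacent pair survives the pass at one of its two positions
theorem aRepl_keep (core snake : List Char) :
    ∀ (ps : List (List Char)) (j : Nat), ps[j]? = some core → ps[j + 1]? = some core →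
      (aRepl core snake ps)[j]? = some core ∨ (aRepl core snake ps)[j + 1]? = some core := by
  intro ps
  fun_induction aRepl core snake ps with
  | case1 => intro j h _; simp at h
  | case2 p => intro j _ h2; rcases j with _ | m <;> simp at h2
  | case3 r ps ih =>
    intro j h1 h2
    match j with
    | 0 => right; simpa using h2
    | 1 => left; simpa using h1
    | (m + 2) =>
      rcases ih m (by simpa using h1) (by simpa using h2) with h | h
      · left; simpa using h
      · right; simpa using h
  | case4 p r ps hne ih =>
    intro j h1 h2
    match j with
    | 0 => exact absurd (by simpa using h1) hne
    | (m + 1) =>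
      rcases ih m (by simpa using h1) (by simpa using h2) with h | h
      · left; simpa using h
      · right; simpa using h

theorem pMap_get (g : List Char → List Char) :
    ∀ (ps : List (List Char)) (j : Nat), j + 1 < ps.length →
      (pMap g ps)[j]? = ps[j]?.map g := by
  intro ps
  induction ps with
  | nil => intro j h; simp at h
  | cons p ps ih =>
    intro j h
    cases ps with
    | nil => simp at h
    | cons a b =>
      match j with
      | 0 => rfl
      | (m + 1) =>
        have := ih m (by simpa using h)
        simpa [pMap] using this

-- value at an index survives a pass for a different enum
theorem keepPass (c v core : List Char) (l : List (List Char)) (j : Nat)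
    (h : l[j]? = some core) (hne : c ≠ core) (hnv : v ≠ core) :
    (aRepl c v l)[j]? = some core := by
  rcases aRepl_get c v l j with h' | ⟨hc', _⟩
  · rw [h', h]
  · rw [h] at hc'
    exact absurd (Option.some.inj hc').symm hne

theorem chainKeep (core : List Char) (hc : core ∈ dCores) (ps : List (List Char)) (j : Nat)
    (h1 : ps[j]? = some core) (h2 : ps[j + 1]? = some core) :
    ∃ i, (i = j ∨ i = j + 1) ∧
      (aRepl "VisitingJudge".toList "visiting_judge".toList (aRepl "BankruptcyJudge".toList "bankruptcy_judge".toList (aRepl "MagistrateJudge".toList "magistrate_judge".toList (aRepl "SeniorJudge".toList "senior_judge".toList (aRepl "ChiefJudge".toList "chief_judge".toList (aRepl "DistrictJudge".toList "district_judge".toList (ps)))))))[i]? = some core := by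
  simp only [dCores, List.mem_cons, List.not_mem_nil, or_false] at hc
  rcases hc with rfl | rfl | rfl | rfl | rfl | rfl
  · -- core = DistrictJudge
    rcases aRepl_keep "DistrictJudge".toList "district_judge".toList (ps) j h1 h2 with hgot | hgot
    · -- kept at position j
      have hp1inl := keepPass "ChiefJudge".toList "chief_judge".toList _ (aRepl "DistrictJudge".toList "district_judge".toList (ps)) (j) hgot (by decide) (by decide)
      have hp2inl := keepPass "SeniorJudge".toList "senior_judge".toList _ (aRepl "ChiefJudge".toList "chief_judge".toList (aRepl "DistrictJudge".toList "district_judge".toList (ps))) (j) hp1inl (by decide) (by decide)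
      have hp3inl := keepPass "MagistrateJudge".toList "magistrate_judge".toList _ (aRepl "SeniorJudge".toList "senior_judge".toList (aRepl "ChiefJudge".toList "chief_judge".toList (aRepl "DistrictJudge".toList "district_judge".toList (ps)))) (j) hp2inl (by decide) (by decide)
      have hp4inl := keepPass "BankruptcyJudge".toList "bankruptcy_judge".toList _ (aRepl "MagistrateJudge".toList "magistrate_judge".toList (aRepl "SeniorJudge".toList "senior_judge".toList (aRepl "ChiefJudge".toList "chief_judge".toList (aRepl "DistrictJudge".toList "district_judge".toList (ps))))) (j) hp3inl (by decide) (by decide)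
      have hp5inl := keepPass "VisitingJudge".toList "visiting_judge".toList _ (aRepl "BankruptcyJudge".toList "bankruptcy_judge".toList (aRepl "MagistrateJudge".toList "magistrate_judge".toList (aRepl "SeniorJudge".toList "senior_judge".toList (aRepl "ChiefJudge".toList "chief_judge".toList (aRepl "DistrictJudge".toList "district_judge".toList (ps)))))) (j) hp4inl (by decide) (by decide)
      exact ⟨j, Or.inl rfl, hp5inl⟩
    · -- kept at position j + 1
      have hp1inr := keepPass "ChiefJudge".toList "chief_judge".toList _ (aRepl "DistrictJudge".toList "district_judge".toList (ps)) (j + 1) hgot (by decide) (by decide)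
      have hp2inr := keepPass "SeniorJudge".toList "senior_judge".toList _ (aRepl "ChiefJudge".toList "chief_judge".toList (aRepl "DistrictJudge".toList "district_judge".toList (ps))) (j + 1) hp1inr (by decide) (by decide)
      have hp3inr := keepPass "MagistrateJudge".toList "magistrate_judge".toList _ (aRepl "SeniorJudge".toList "senior_judge".toList (aRepl "ChiefJudge".toList "chief_judge".toList (aRepl "DistrictJudge".toList "district_judge".toList (ps)))) (j + 1) hp2inr (by decide) (by decide)
      have hp4inr := keepPass "BankruptcyJudge".toList "bankruptcy_judge".toList _ (aRepl "MagistrateJudge".toList "magistrate_judge".toList (aRepl "SeniorJudge".toList "senior_judge".toList (aRepl "ChiefJudge".toList "chief_judge".toList (aRepl "DistrictJudge".toList "district_judge".toList (ps))))) (j + 1) hp3inr (by decide) (by decide)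
      have hp5inr := keepPass "VisitingJudge".toList "visiting_judge".toList _ (aRepl "BankruptcyJudge".toList "bankruptcy_judge".toList (aRepl "MagistrateJudge".toList "magistrate_judge".toList (aRepl "SeniorJudge".toList "senior_judge".toList (aRepl "ChiefJudge".toList "chief_judge".toList (aRepl "DistrictJudge".toList "district_judge".toList (ps)))))) (j + 1) hp4inr (by decide) (by decide)
      exact ⟨j + 1, Or.inr rfl, hp5inr⟩
  · -- core = ChiefJudge
    have hj0 := keepPass "DistrictJudge".toList "district_judge".toList _ (ps) j h1 (by decide) (by decide)
    have hk0 := keepPass "DistrictJudge".toList "district_judge".toList _ (ps) (j + 1) h2 (by decide) (by decide)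
    rcases aRepl_keep "ChiefJudge".toList "chief_judge".toList (aRepl "DistrictJudge".toList "district_judge".toList (ps)) j hj0 hk0 with hgot | hgot
    · -- kept at position j
      have hp2inl := keepPass "SeniorJudge".toList "senior_judge".toList _ (aRepl "ChiefJudge".toList "chief_judge".toList (aRepl "DistrictJudge".toList "district_judge".toList (ps))) (j) hgot (by decide) (by decide)
      have hp3inl := keepPass "MagistrateJudge".toList "magistrate_judge".toList _ (aRepl "SeniorJudge".toList "senior_judge".toList (aRepl "ChiefJudge".toList "chief_judge".toList (aRepl "DistrictJudge".toList "district_judge".toList (ps)))) (j) hp2inl (by decide) (by decide)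
      have hp4inl := keepPass "BankruptcyJudge".toList "bankruptcy_judge".toList _ (aRepl "MagistrateJudge".toList "magistrate_judge".toList (aRepl "SeniorJudge".toList "senior_judge".toList (aRepl "ChiefJudge".toList "chief_judge".toList (aRepl "DistrictJudge".toList "district_judge".toList (ps))))) (j) hp3inl (by decide) (by decide)
      have hp5inl := keepPass "VisitingJudge".toList "visiting_judge".toList _ (aRepl "BankruptcyJudge".toList "bankruptcy_judge".toList (aRepl "MagistrateJudge".toList "magistrate_judge".toList (aRepl "SeniorJudge".toList "senior_judge".toList (aRepl "ChiefJudge".toList "chief_judge".toList (aRepl "DistrictJudge".toList "district_judge".toList (ps)))))) (j) hp4inl (by decide) (by decide)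
      exact ⟨j, Or.inl rfl, hp5inl⟩
    · -- kept at position j + 1
      have hp2inr := keepPass "SeniorJudge".toList "senior_judge".toList _ (aRepl "ChiefJudge".toList "chief_judge".toList (aRepl "DistrictJudge".toList "district_judge".toList (ps))) (j + 1) hgot (by decide) (by decide)
      have hp3inr := keepPass "MagistrateJudge".toList "magistrate_judge".toList _ (aRepl "SeniorJudge".toList "senior_judge".toList (aRepl "ChiefJudge".toList "chief_judge".toList (aRepl "DistrictJudge".toList "district_judge".toList (ps)))) (j + 1) hp2inr (by decide) (by decide)
      have hp4inr := keepPass "BankruptcyJudge".toList "bankruptcy_judge".toList _ (aRepl "MagistrateJudge".toList "magistrate_judge".toList (aRepl "SeniorJudge".toList "senior_judge".toList (aRepl "ChiefJudge".toList "chief_judge".toList (aRepl "DistrictJudge".toList "district_judge".toList (ps))))) (j + 1) hp3inr (by decide) (by decide)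
      have hp5inr := keepPass "VisitingJudge".toList "visiting_judge".toList _ (aRepl "BankruptcyJudge".toList "bankruptcy_judge".toList (aRepl "MagistrateJudge".toList "magistrate_judge".toList (aRepl "SeniorJudge".toList "senior_judge".toList (aRepl "ChiefJudge".toList "chief_judge".toList (aRepl "DistrictJudge".toList "district_judge".toList (ps)))))) (j + 1) hp4inr (by decide) (by decide)
      exact ⟨j + 1, Or.inr rfl, hp5inr⟩
  · -- core = SeniorJudge
    have hj0 := keepPass "DistrictJudge".toList "district_judge".toList _ (ps) j h1 (by decide) (by decide)
    have hk0 := keepPass "DistrictJudge".toList "district_judge".toList _ (ps) (j + 1) h2 (by decide) (by decide)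
    have hj1 := keepPass "ChiefJudge".toList "chief_judge".toList _ (aRepl "DistrictJudge".toList "district_judge".toList (ps)) j hj0 (by decide) (by decide)
    have hk1 := keepPass "ChiefJudge".toList "chief_judge".toList _ (aRepl "DistrictJudge".toList "district_judge".toList (ps)) (j + 1) hk0 (by decide) (by decide)
    rcases aRepl_keep "SeniorJudge".toList "senior_judge".toList (aRepl "ChiefJudge".toList "chief_judge".toList (aRepl "DistrictJudge".toList "district_judge".toList (ps))) j hj1 hk1 with hgot | hgot
    · -- kept at position j
      have hp3inl := keepPass "MagistrateJudge".toList "magistrate_judge".toList _ (aRepl "SeniorJudge".toList "senior_judge".toList (aRepl "ChiefJudge".toList "chief_judge".toList (aRepl "DistrictJudge".toList "district_judge".toList (ps)))) (j) hgot (by decide) (by decide)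
      have hp4inl := keepPass "BankruptcyJudge".toList "bankruptcy_judge".toList _ (aRepl "MagistrateJudge".toList "magistrate_judge".toList (aRepl "SeniorJudge".toList "senior_judge".toList (aRepl "ChiefJudge".toList "chief_judge".toList (aRepl "DistrictJudge".toList "district_judge".toList (ps))))) (j) hp3inl (by decide) (by decide)
      have hp5inl := keepPass "VisitingJudge".toList "visiting_judge".toList _ (aRepl "BankruptcyJudge".toList "bankruptcy_judge".toList (aRepl "MagistrateJudge".toList "magistrate_judge".toList (aRepl "SeniorJudge".toList "senior_judge".toList (aRepl "ChiefJudge".toList "chief_judge".toList (aRepl "DistrictJudge".toList "district_judge".toList (ps)))))) (j) hp4inl (by decide) (by decide)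
      exact ⟨j, Or.inl rfl, hp5inl⟩
    · -- kept at position j + 1
      have hp3inr := keepPass "MagistrateJudge".toList "magistrate_judge".toList _ (aRepl "SeniorJudge".toList "senior_judge".toList (aRepl "ChiefJudge".toList "chief_judge".toList (aRepl "DistrictJudge".toList "district_judge".toList (ps)))) (j + 1) hgot (by decide) (by decide)
      have hp4inr := keepPass "BankruptcyJudge".toList "bankruptcy_judge".toList _ (aRepl "MagistrateJudge".toList "magistrate_judge".toList (aRepl "SeniorJudge".toList "senior_judge".toList (aRepl "ChiefJudge".toList "chief_judge".toList (aRepl "DistrictJudge".toList "district_judge".toList (ps))))) (j + 1) hp3inr (by decide) (by decide)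
      have hp5inr := keepPass "VisitingJudge".toList "visiting_judge".toList _ (aRepl "BankruptcyJudge".toList "bankruptcy_judge".toList (aRepl "MagistrateJudge".toList "magistrate_judge".toList (aRepl "SeniorJudge".toList "senior_judge".toList (aRepl "ChiefJudge".toList "chief_judge".toList (aRepl "DistrictJudge".toList "district_judge".toList (ps)))))) (j + 1) hp4inr (by decide) (by decide)
      exact ⟨j + 1, Or.inr rfl, hp5inr⟩
  · -- core = MagistrateJudge
    have hj0 := keepPass "DistrictJudge".toList "district_judge".toList _ (ps) j h1 (by decide) (by decide)
    have hk0 := keepPass "DistrictJudge".toList "district_judge".toList _ (ps) (j + 1) h2 (by decide) (by decide)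
    have hj1 := keepPass "ChiefJudge".toList "chief_judge".toList _ (aRepl "DistrictJudge".toList "district_judge".toList (ps)) j hj0 (by decide) (by decide)
    have hk1 := keepPass "ChiefJudge".toList "chief_judge".toList _ (aRepl "DistrictJudge".toList "district_judge".toList (ps)) (j + 1) hk0 (by decide) (by decide)
    have hj2 := keepPass "SeniorJudge".toList "senior_judge".toList _ (aRepl "ChiefJudge".toList "chief_judge".toList (aRepl "DistrictJudge".toList "district_judge".toList (ps))) j hj1 (by decide) (by decide)
    have hk2 := keepPass "SeniorJudge".toList "senior_judge".toList _ (aRepl "ChiefJudge".toList "chief_judge".toList (aRepl "DistrictJudge".toList "district_judge".toList (ps))) (j + 1) hk1 (by decide) (by decide)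
    rcases aRepl_keep "MagistrateJudge".toList "magistrate_judge".toList (aRepl "SeniorJudge".toList "senior_judge".toList (aRepl "ChiefJudge".toList "chief_judge".toList (aRepl "DistrictJudge".toList "district_judge".toList (ps)))) j hj2 hk2 with hgot | hgot
    · -- kept at position j
      have hp4inl := keepPass "BankruptcyJudge".toList "bankruptcy_judge".toList _ (aRepl "MagistrateJudge".toList "magistrate_judge".toList (aRepl "SeniorJudge".toList "senior_judge".toList (aRepl "ChiefJudge".toList "chief_judge".toList (aRepl "DistrictJudge".toList "district_judge".toList (ps))))) (j) hgot (by decide) (by decide)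
      have hp5inl := keepPass "VisitingJudge".toList "visiting_judge".toList _ (aRepl "BankruptcyJudge".toList "bankruptcy_judge".toList (aRepl "MagistrateJudge".toList "magistrate_judge".toList (aRepl "SeniorJudge".toList "senior_judge".toList (aRepl "ChiefJudge".toList "chief_judge".toList (aRepl "DistrictJudge".toList "district_judge".toList (ps)))))) (j) hp4inl (by decide) (by decide)
      exact ⟨j, Or.inl rfl, hp5inl⟩
    · -- kept at position j + 1
      have hp4inr := keepPass "BankruptcyJudge".toList "bankruptcy_judge".toList _ (aRepl "MagistrateJudge".toList "magistrate_judge".toList (aRepl "SeniorJudge".toList "senior_judge".toList (aRepl "ChiefJudge".toList "chief_judge".toList (aRepl "DistrictJudge".toList "district_judge".toList (ps))))) (j + 1) hgot (by decide) (by decide)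
      have hp5inr := keepPass "VisitingJudge".toList "visiting_judge".toList _ (aRepl "BankruptcyJudge".toList "bankruptcy_judge".toList (aRepl "MagistrateJudge".toList "magistrate_judge".toList (aRepl "SeniorJudge".toList "senior_judge".toList (aRepl "ChiefJudge".toList "chief_judge".toList (aRepl "DistrictJudge".toList "district_judge".toList (ps)))))) (j + 1) hp4inr (by decide) (by decide)
      exact ⟨j + 1, Or.inr rfl, hp5inr⟩
  · -- core = BankruptcyJudge
    have hj0 := keepPass "DistrictJudge".toList "district_judge".toList _ (ps) j h1 (by decide) (by decide)
    have hk0 := keepPass "DistrictJudge".toList "district_judge".toList _ (ps) (j + 1) h2 (by decide) (by decide)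
    have hj1 := keepPass "ChiefJudge".toList "chief_judge".toList _ (aRepl "DistrictJudge".toList "district_judge".toList (ps)) j hj0 (by decide) (by decide)
    have hk1 := keepPass "ChiefJudge".toList "chief_judge".toList _ (aRepl "DistrictJudge".toList "district_judge".toList (ps)) (j + 1) hk0 (by decide) (by decide)
    have hj2 := keepPass "SeniorJudge".toList "senior_judge".toList _ (aRepl "ChiefJudge".toList "chief_judge".toList (aRepl "DistrictJudge".toList "district_judge".toList (ps))) j hj1 (by decide) (by decide)
    have hk2 := keepPass "SeniorJudge".toList "senior_judge".toList _ (aRepl "ChiefJudge".toList "chief_judge".toList (aRepl "DistrictJudge".toList "district_judge".toList (ps))) (j + 1) hk1 (by decide) (by decide)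
    have hj3 := keepPass "MagistrateJudge".toList "magistrate_judge".toList _ (aRepl "SeniorJudge".toList "senior_judge".toList (aRepl "ChiefJudge".toList "chief_judge".toList (aRepl "DistrictJudge".toList "district_judge".toList (ps)))) j hj2 (by decide) (by decide)
    have hk3 := keepPass "MagistrateJudge".toList "magistrate_judge".toList _ (aRepl "SeniorJudge".toList "senior_judge".toList (aRepl "ChiefJudge".toList "chief_judge".toList (aRepl "DistrictJudge".toList "district_judge".toList (ps)))) (j + 1) hk2 (by decide) (by decide)
    rcases aRepl_keep "BankruptcyJudge".toList "bankruptcy_judge".toList (aRepl "MagistrateJudge".toList "magistrate_judge".toList (aRepl "SeniorJudge".toList "senior_judge".toList (aRepl "ChiefJudge".toList "chief_judge".toList (aRepl "DistrictJudge".toList "district_judge".toList (ps))))) j hj3 hk3 with hgot | hgot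
    · -- kept at position j
      have hp5inl := keepPass "VisitingJudge".toList "visiting_judge".toList _ (aRepl "BankruptcyJudge".toList "bankruptcy_judge".toList (aRepl "MagistrateJudge".toList "magistrate_judge".toList (aRepl "SeniorJudge".toList "senior_judge".toList (aRepl "ChiefJudge".toList "chief_judge".toList (aRepl "DistrictJudge".toList "district_judge".toList (ps)))))) (j) hgot (by decide) (by decide)
      exact ⟨j, Or.inl rfl, hp5inl⟩
    · -- kept at position j + 1
      have hp5inr := keepPass "VisitingJudge".toList "visiting_judge".toList _ (aRepl "BankruptcyJudge".toList "bankruptcy_judge".toList (aRepl "MagistrateJudge".toList "magistrate_judge".toList (aRepl "SeniorJudge".toList "senior_judge".toList (aRepl "ChiefJudge".toList "chief_judge".toList (aRepl "DistrictJudge".toList "district_judge".toList (ps)))))) (j + 1) hgot (by decide) (by decide)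
      exact ⟨j + 1, Or.inr rfl, hp5inr⟩
  · -- core = VisitingJudge
    have hj0 := keepPass "DistrictJudge".toList "district_judge".toList _ (ps) j h1 (by decide) (by decide)
    have hk0 := keepPass "DistrictJudge".toList "district_judge".toList _ (ps) (j + 1) h2 (by decide) (by decide)
    have hj1 := keepPass "ChiefJudge".toList "chief_judge".toList _ (aRepl "DistrictJudge".toList "district_judge".toList (ps)) j hj0 (by decide) (by decide)
    have hk1 := keepPass "ChiefJudge".toList "chief_judge".toList _ (aRepl "DistrictJudge".toList "district_judge".toList (ps)) (j + 1) hk0 (by decide) (by decide)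
    have hj2 := keepPass "SeniorJudge".toList "senior_judge".toList _ (aRepl "ChiefJudge".toList "chief_judge".toList (aRepl "DistrictJudge".toList "district_judge".toList (ps))) j hj1 (by decide) (by decide)
    have hk2 := keepPass "SeniorJudge".toList "senior_judge".toList _ (aRepl "ChiefJudge".toList "chief_judge".toList (aRepl "DistrictJudge".toList "district_judge".toList (ps))) (j + 1) hk1 (by decide) (by decide)
    have hj3 := keepPass "MagistrateJudge".toList "magistrate_judge".toList _ (aRepl "SeniorJudge".toList "senior_judge".toList (aRepl "ChiefJudge".toList "chief_judge".toList (aRepl "DistrictJudge".toList "district_judge".toList (ps)))) j hj2 (by decide) (by decide)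
    have hk3 := keepPass "MagistrateJudge".toList "magistrate_judge".toList _ (aRepl "SeniorJudge".toList "senior_judge".toList (aRepl "ChiefJudge".toList "chief_judge".toList (aRepl "DistrictJudge".toList "district_judge".toList (ps)))) (j + 1) hk2 (by decide) (by decide)
    have hj4 := keepPass "BankruptcyJudge".toList "bankruptcy_judge".toList _ (aRepl "MagistrateJudge".toList "magistrate_judge".toList (aRepl "SeniorJudge".toList "senior_judge".toList (aRepl "ChiefJudge".toList "chief_judge".toList (aRepl "DistrictJudge".toList "district_judge".toList (ps))))) j hj3 (by decide) (by decide)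
    have hk4 := keepPass "BankruptcyJudge".toList "bankruptcy_judge".toList _ (aRepl "MagistrateJudge".toList "magistrate_judge".toList (aRepl "SeniorJudge".toList "senior_judge".toList (aRepl "ChiefJudge".toList "chief_judge".toList (aRepl "DistrictJudge".toList "district_judge".toList (ps))))) (j + 1) hk3 (by decide) (by decide)
    rcases aRepl_keep "VisitingJudge".toList "visiting_judge".toList (aRepl "BankruptcyJudge".toList "bankruptcy_judge".toList (aRepl "MagistrateJudge".toList "magistrate_judge".toList (aRepl "SeniorJudge".toList "senior_judge".toList (aRepl "ChiefJudge".toList "chief_judge".toList (aRepl "DistrictJudge".toList "district_judge".toList (ps)))))) j hj4 hk4 with hgot | hgot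
    · -- kept at position j
      exact ⟨j, Or.inl rfl, hgot⟩
    · -- kept at position j + 1
      exact ⟨j + 1, Or.inr rfl, hgot⟩

theorem altGetL_ne (core : List Char) (hc : core ∈ dCores) (x : List Char) :
    altGetL x ≠ core := by
  have hcs : ∀ s ∈ dCores, s ≠ "district_judge".toList ∧ s ≠ "chief_judge".toList ∧
      s ≠ "senior_judge".toList ∧ s ≠ "magistrate_judge".toList ∧
      s ≠ "bankruptcy_judge".toList ∧ s ≠ "visiting_judge".toList := by decide
  obtain ⟨n1, n2, n3, n4, n5, n6⟩ := hcs core hc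
  unfold altGetL
  split_ifs with h1 h2 h3 h4 h5 h6
  · exact fun hh => n1 hh.symm
  · exact fun hh => n2 hh.symm
  · exact fun hh => n3 hh.symm
  · exact fun hh => n4 hh.symm
  · exact fun hh => n5 hh.symm
  · exact fun hh => n6 hh.symm
  · intro hh
    subst hh
    simp only [dCores, List.mem_cons, List.not_mem_nil, or_false] at hc
    rcases hc with h | h | h | h | h | h
    · exact h1 h
    · exact h2 h
    · exact h3 h
    · exact h4 h
    · exact h5 h
    · exact h6 h

theorem altGetL_free (x : List Char) (hx : '"' ∉ x) : '"' ∉ altGetL x := by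
  unfold altGetL
  split_ifs <;> first | exact hx | decide

theorem dCores_free : ∀ core ∈ dCores, '"' ∉ core := by decide

theorem AsideGen (p0 : List Char) (hp0 : '"' ∉ p0) (ps : List (List Char))
    (hfree : ∀ p ∈ ps, '"' ∉ p) :
    repC (repC (repC (repC (repC (repC (myT (p0 :: ps)) "DistrictJudge".toList "district_judge".toList) "ChiefJudge".toList "chief_judge".toList) "SeniorJudge".toList "senior_judge".toList) "MagistrateJudge".toList "magistrate_judge".toList) "BankruptcyJudge".toList "bankruptcy_judge".toList) "VisitingJudge".toList "visiting_judge".toList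
      = myT (p0 :: aRepl "VisitingJudge".toList "visiting_judge".toList (aRepl "BankruptcyJudge".toList "bankruptcy_judge".toList (aRepl "MagistrateJudge".toList "magistrate_judge".toList (aRepl "SeniorJudge".toList "senior_judge".toList (aRepl "ChiefJudge".toList "chief_judge".toList (aRepl "DistrictJudge".toList "district_judge".toList (ps))))))) := by
  rw [show repC (myT (p0 :: (ps))) "DistrictJudge".toList "district_judge".toList = myT (p0 :: aRepl "DistrictJudge".toList "district_judge".toList (ps)) from by unfold repC; rw [topKey "DistrictJudge".toList "district_judge".toList (by decide) (by decide) p0 hp0 (ps) hfree]]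
  have free1 : ∀ p ∈ aRepl "DistrictJudge".toList "district_judge".toList (ps), '"' ∉ p := aRepl_free "DistrictJudge".toList "district_judge".toList (by decide) (ps) hfree
  rw [show repC (myT (p0 :: (aRepl "DistrictJudge".toList "district_judge".toList (ps)))) "ChiefJudge".toList "chief_judge".toList = myT (p0 :: aRepl "ChiefJudge".toList "chief_judge".toList (aRepl "DistrictJudge".toList "district_judge".toList (ps))) from by unfold repC; rw [topKey "ChiefJudge".toList "chief_judge".toList (by decide) (by decide) p0 hp0 (aRepl "DistrictJudge".toList "district_judge".toList (ps)) free1]]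
  have free2 : ∀ p ∈ aRepl "ChiefJudge".toList "chief_judge".toList (aRepl "DistrictJudge".toList "district_judge".toList (ps)), '"' ∉ p := aRepl_free "ChiefJudge".toList "chief_judge".toList (by decide) (aRepl "DistrictJudge".toList "district_judge".toList (ps)) free1
  rw [show repC (myT (p0 :: (aRepl "ChiefJudge".toList "chief_judge".toList (aRepl "DistrictJudge".toList "district_judge".toList (ps))))) "SeniorJudge".toList "senior_judge".toList = myT (p0 :: aRepl "SeniorJudge".toList "senior_judge".toList (aRepl "ChiefJudge".toList "chief_judge".toList (aRepl "DistrictJudge".toList "district_judge".toList (ps)))) from by unfold repC; rw [topKey "SeniorJudge".toList "senior_judge".toList (by decide) (by decide) p0 hp0 (aRepl "ChiefJudge".toList "chief_judge".toList (aRepl "DistrictJudge".toList "district_judge".toList (ps))) free2]]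
  have free3 : ∀ p ∈ aRepl "SeniorJudge".toList "senior_judge".toList (aRepl "ChiefJudge".toList "chief_judge".toList (aRepl "DistrictJudge".toList "district_judge".toList (ps))), '"' ∉ p := aRepl_free "SeniorJudge".toList "senior_judge".toList (by decide) (aRepl "ChiefJudge".toList "chief_judge".toList (aRepl "DistrictJudge".toList "district_judge".toList (ps))) free2
  rw [show repC (myT (p0 :: (aRepl "SeniorJudge".toList "senior_judge".toList (aRepl "ChiefJudge".toList "chief_judge".toList (aRepl "DistrictJudge".toList "district_judge".toList (ps)))))) "MagistrateJudge".toList "magistrate_judge".toList = myT (p0 :: aRepl "MagistrateJudge".toList "magistrate_judge".toList (aRepl "SeniorJudge".toList "senior_judge".toList (aRepl "ChiefJudge".toList "chief_judge".toList (aRepl "DistrictJudge".toList "district_judge".toList (ps))))) from by unfold repC; rw [topKey "MagistrateJudge".toList "magistrate_judge".toList (by decide) (by decide) p0 hp0 (aRepl "SeniorJudge".toList "senior_judge".toList (aRepl "ChiefJudge".toList "chief_judge".toList (aRepl "DistrictJudge".toList "district_judge".toList (ps)))) free3]]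
  have free4 : ∀ p ∈ aRepl "MagistrateJudge".toList "magistrate_judge".toList (aRepl "SeniorJudge".toList "senior_judge".toList (aRepl "ChiefJudge".toList "chief_judge".toList (aRepl "DistrictJudge".toList "district_judge".toList (ps)))), '"' ∉ p := aRepl_free "MagistrateJudge".toList "magistrate_judge".toList (by decide) (aRepl "SeniorJudge".toList "senior_judge".toList (aRepl "ChiefJudge".toList "chief_judge".toList (aRepl "DistrictJudge".toList "district_judge".toList (ps)))) free3
  rw [show repC (myT (p0 :: (aRepl "MagistrateJudge".toList "magistrate_judge".toList (aRepl "SeniorJudge".toList "senior_judge".toList (aRepl "ChiefJudge".toList "chief_judge".toList (aRepl "DistrictJudge".toList "district_judge".toList (ps))))))) "BankruptcyJudge".toList "bankruptcy_judge".toList = myT (p0 :: aRepl "BankruptcyJudge".toList "bankruptcy_judge".toList (aRepl "MagistrateJudge".toList "magistrate_judge".toList (aRepl "SeniorJudge".toList "senior_judge".toList (aRepl "ChiefJudge".toList "chief_judge".toList (aRepl "DistrictJudge".toList "district_judge".toList (ps)))))) from by unfold repC; rw [topKey "BankruptcyJudge".toList "bankruptcy_judge".toList (by decide) (by decide) p0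 hp0 (aRepl "MagistrateJudge".toList "magistrate_judge".toList (aRepl "SeniorJudge".toList "senior_judge".toList (aRepl "ChiefJudge".toList "chief_judge".toList (aRepl "DistrictJudge".toList "district_judge".toList (ps))))) free4]]
  have free5 : ∀ p ∈ aRepl "BankruptcyJudge".toList "bankruptcy_judge".toList (aRepl "MagistrateJudge".toList "magistrate_judge".toList (aRepl "SeniorJudge".toList "senior_judge".toList (aRepl "ChiefJudge".toList "chief_judge".toList (aRepl "DistrictJudge".toList "district_judge".toList (ps))))), '"' ∉ p := aRepl_free "BankruptcyJudge".toList "bankruptcy_judge".toList (by decide) (aRepl "MagistrateJudge".toList "magistrate_judge".toList (aRepl "SeniorJudge".toList "senior_judge".toList (aRepl "ChiefJudge".toList "chief_judge".toList (aRepl "DistrictJudge".toList "district_judge".toList (ps))))) free4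
  rw [show repC (myT (p0 :: (aRepl "BankruptcyJudge".toList "bankruptcy_judge".toList (aRepl "MagistrateJudge".toList "magistrate_judge".toList (aRepl "SeniorJudge".toList "senior_judge".toList (aRepl "ChiefJudge".toList "chief_judge".toList (aRepl "DistrictJudge".toList "district_judge".toList (ps)))))))) "VisitingJudge".toList "visiting_judge".toList = myT (p0 :: aRepl "VisitingJudge".toList "visiting_judge".toList (aRepl "BankruptcyJudge".toList "bankruptcy_judge".toList (aRepl "MagistrateJudge".toList "magistrate_judge".toList (aRepl "SeniorJudge".toList "senior_judge".toList (aRepl "ChiefJudge".toList "chief_judge".toList (aRepl "DistrictJudge".toList "district_judge".toList (ps))))))) from by unfold repC; rw [topKey "VisitingJudge".toList "visiting_judge".toList (by decide) (by decide) p0 hp0 (aRepl "BankruptcyJudge".toList "bankruptcy_judge".toList (aRepl "MagistrateJudge".toList "magistrate_judge".toList (aRepl "SeniorJudge".toList "senior_judge".toList (aRepl "ChiefJudge".toList "chief_judge".toList (aRepl "DistrictJudge".toList "district_judge".toList (ps)))))) free5]]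

theorem A_chain (content : String) :
    fix_judge_title_enums content = String.ofList (repC (repC (repC (repC (repC (repC (content.toList) "DistrictJudge".toList "district_judge".toList) "ChiefJudge".toList "chief_judge".toList) "SeniorJudge".toList "senior_judge".toList) "MagistrateJudge".toList "magistrate_judge".toList) "BankruptcyJudge".toList "bankruptcy_judge".toList) "VisitingJudge".toList "visiting_judge".toList) := by
  have k1 : ("\"DistrictJudge\"" : String).toList = '"' :: ("DistrictJudge".toList ++ ['"']) := by decide
  have v1 : ("\"district_judge\"" : String).toList = '"' :: ("district_judge".toList ++ ['"']) := by decide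
  have k2 : ("\"ChiefJudge\"" : String).toList = '"' :: ("ChiefJudge".toList ++ ['"']) := by decide
  have v2 : ("\"chief_judge\"" : String).toList = '"' :: ("chief_judge".toList ++ ['"']) := by decide
  have k3 : ("\"SeniorJudge\"" : String).toList = '"' :: ("SeniorJudge".toList ++ ['"']) := by decide
  have v3 : ("\"senior_judge\"" : String).toList = '"' :: ("senior_judge".toList ++ ['"']) := by decide
  have k4 : ("\"MagistrateJudge\"" : String).toList = '"' :: ("MagistrateJudge".toList ++ ['"']) := by decide
  have v4 : ("\"magistrate_judge\"" : String).toList = '"' :: ("magistrate_judge".toList ++ ['"']) := by decide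
  have k5 : ("\"BankruptcyJudge\"" : String).toList = '"' :: ("BankruptcyJudge".toList ++ ['"']) := by decide
  have v5 : ("\"bankruptcy_judge\"" : String).toList = '"' :: ("bankruptcy_judge".toList ++ ['"']) := by decide
  have k6 : ("\"VisitingJudge\"" : String).toList = '"' :: ("VisitingJudge".toList ++ ['"']) := by decide
  have v6 : ("\"visiting_judge\"" : String).toList = '"' :: ("visiting_judge".toList ++ ['"']) := by decide
  simp only [fix_judge_title_enums, List.foldl, PySem.Str.replace, String.toList_ofList,
    repC, k1, k2, k3, k4, k5, k6, v1, v2, v3, v4, v5, v6]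

theorem fix_judge_title_enums_tight' : ∀ (content : String),
    D_fix_judge_title_enums content →
    fix_judge_title_enums content ≠ fix_judge_title_enums_alt content := by
  intro content hd
  obtain ⟨core, hc, hisin⟩ := hd
  have hcfree : '"' ∉ core := dCores_free core hc
  obtain ⟨p0, ps, hsp⟩ : ∃ p0 ps, mySplit content.toList = p0 :: ps := by
    cases hh : mySplit content.toList with
    | nil => exact absurd hh (mySplit_ne_nil content.toList)
    | cons a b => exact ⟨a, b, rfl⟩
  have hp0 : '"' ∉ p0 := mySplit_free content.toList p0 (by rw [hsp]; simp)
  have hfree : ∀ p ∈ ps, '"' ∉ p := fun p hp =>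
    mySplit_free content.toList p (by rw [hsp]; exact List.mem_cons_of_mem _ hp)
  have hcs : content.toList = myT (p0 :: ps) := by rw [← myT_mySplit content.toList, hsp]
  have hallfree : ∀ p ∈ p0 :: ps, '"' ∉ p := by
    intro p hp
    rcases List.mem_cons.mp hp with rfl | hp
    · exact hp0
    · exact hfree p hp
  have hinf : ('"' :: (core ++ '"' :: (core ++ ['"']))) <:+: myT (p0 :: ps) := by
    have h0 := (PySem.Chars.isIn_iff_infix _ _).mp hisin
    rw [hcs] at h0
    have hsp2 : ('"' :: core ++ '"' :: core ++ ['"'] : List Char)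
        = ('"' :: (core ++ '"' :: (core ++ ['"']))) := by simp
    rwa [hsp2] at h0
  obtain ⟨L, rest, hsplit, hL, hrest⟩ := pat_split core hcfree (p0 :: ps) hallfree hinf
  cases L with
  | nil => exact absurd rfl hL
  | cons q L' =>
  have hps : ps = L' ++ core :: core :: rest := by
    have := ((List.cons.injEq _ _ _ _).mp (by simpa using hsplit)).2
    exact this
  have hrestlen : 0 < rest.length := List.length_pos_of_ne_nil hrest
  have hlenps : ps.length = L'.length + 2 + rest.length := by
    rw [hps]; simp; omega
  have hj : ps[L'.length]? = some core := by
    rw [hps, List.getElem?_append_right (le_refl _)]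
    simp
  have hj1 : ps[L'.length + 1]? = some core := by
    rw [hps, List.getElem?_append_right (by omega)]
    have : L'.length + 1 - L'.length = 1 := by omega
    rw [this]
    rfl
  obtain ⟨i, hi_or, hARi⟩ := chainKeep core hc ps L'.length hj hj1
  have hilt : i + 1 < ps.length := by rcases hi_or with rfl | rfl <;> omega
  have hBi : (pMap altGetL ps)[i]? ≠ some core := by
    rw [pMap_get altGetL ps i hilt]
    obtain ⟨x, hx⟩ : ∃ x, ps[i]? = some x :=
      ⟨ps[i]'(by omega), List.getElem?_eq_getElem (by omega)⟩
    rw [hx]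
    simp only [Option.map_some]
    intro hh
    exact altGetL_ne core hc x (Option.some.inj hh)
  have hARne : (aRepl "VisitingJudge".toList "visiting_judge".toList (aRepl "BankruptcyJudge".toList "bankruptcy_judge".toList (aRepl "MagistrateJudge".toList "magistrate_judge".toList (aRepl "SeniorJudge".toList "senior_judge".toList (aRepl "ChiefJudge".toList "chief_judge".toList (aRepl "DistrictJudge".toList "district_judge".toList (ps))))))) ≠ pMap altGetL ps := by
    intro heq
    rw [heq] at hARi
    exact hBi hARi
  have gfree1 : ∀ p ∈ aRepl "DistrictJudge".toList "district_judge".toList (ps), '"' ∉ p := aRepl_free "DistrictJudge".toList "district_judge".toList (by decide) (ps) hfree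
  have gfree2 : ∀ p ∈ aRepl "ChiefJudge".toList "chief_judge".toList (aRepl "DistrictJudge".toList "district_judge".toList (ps)), '"' ∉ p := aRepl_free "ChiefJudge".toList "chief_judge".toList (by decide) (aRepl "DistrictJudge".toList "district_judge".toList (ps)) gfree1
  have gfree3 : ∀ p ∈ aRepl "SeniorJudge".toList "senior_judge".toList (aRepl "ChiefJudge".toList "chief_judge".toList (aRepl "DistrictJudge".toList "district_judge".toList (ps))), '"' ∉ p := aRepl_free "SeniorJudge".toList "senior_judge".toList (by decide) (aRepl "ChiefJudge".toList "chief_judge".toList (aRepl "DistrictJudge".toList "district_judge".toList (ps))) gfree2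
  have gfree4 : ∀ p ∈ aRepl "MagistrateJudge".toList "magistrate_judge".toList (aRepl "SeniorJudge".toList "senior_judge".toList (aRepl "ChiefJudge".toList "chief_judge".toList (aRepl "DistrictJudge".toList "district_judge".toList (ps)))), '"' ∉ p := aRepl_free "MagistrateJudge".toList "magistrate_judge".toList (by decide) (aRepl "SeniorJudge".toList "senior_judge".toList (aRepl "ChiefJudge".toList "chief_judge".toList (aRepl "DistrictJudge".toList "district_judge".toList (ps)))) gfree3
  have gfree5 : ∀ p ∈ aRepl "BankruptcyJudge".toList "bankruptcy_judge".toList (aRepl "MagistrateJudge".toList "magistrate_judge".toList (aRepl "SeniorJudge".toList "senior_judge".toList (aRepl "ChiefJudge".toList "chief_judge".toList (aRepl "DistrictJudge".toList "district_judge".toList (ps))))), '"' ∉ p := aRepl_free "BankruptcyJudge".toList "bankruptcy_judge".toList (by decide) (aRepl "MagistrateJudge".toList "magistrate_judge".toList (aRepl "SeniorJudge".toList "senior_judge".toList (aRepl "ChiefJudge".toList "chief_judge".toList (aRepl "DistrictJudge".toList "district_judge".toList (ps))))) gfree4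
  have gfree6 : ∀ p ∈ aRepl "VisitingJudge".toList "visiting_judge".toList (aRepl "BankruptcyJudge".toList "bankruptcy_judge".toList (aRepl "MagistrateJudge".toList "magistrate_judge".toList (aRepl "SeniorJudge".toList "senior_judge".toList (aRepl "ChiefJudge".toList "chief_judge".toList (aRepl "DistrictJudge".toList "district_judge".toList (ps)))))), '"' ∉ p := aRepl_free "VisitingJudge".toList "visiting_judge".toList (by decide) (aRepl "BankruptcyJudge".toList "bankruptcy_judge".toList (aRepl "MagistrateJudge".toList "magistrate_judge".toList (aRepl "SeniorJudge".toList "senior_judge".toList (aRepl "ChiefJudge".toList "chief_judge".toList (aRepl "DistrictJudge".toList "district_judge".toList (ps)))))) gfree5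
  have hpfree : ∀ p ∈ pMap altGetL ps, '"' ∉ p := pMap_free altGetL altGetL_free ps hfree
  intro hAB
  apply hARne
  have hAr : fix_judge_title_enums content = String.ofList (myT (p0 :: aRepl "VisitingJudge".toList "visiting_judge".toList (aRepl "BankruptcyJudge".toList "bankruptcy_judge".toList (aRepl "MagistrateJudge".toList "magistrate_judge".toList (aRepl "SeniorJudge".toList "senior_judge".toList (aRepl "ChiefJudge".toList "chief_judge".toList (aRepl "DistrictJudge".toList "district_judge".toList (ps)))))))) := by
    rw [A_chain, hcs, AsideGen p0 hp0 ps hfree]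
  have hBr : fix_judge_title_enums_alt content = String.ofList (myT (p0 :: pMap altGetL ps)) :=
    Bside content p0 ps hsp
  rw [hAr, hBr] at hAB
  have hT : myT (p0 :: aRepl "VisitingJudge".toList "visiting_judge".toList (aRepl "BankruptcyJudge".toList "bankruptcy_judge".toList (aRepl "MagistrateJudge".toList "magistrate_judge".toList (aRepl "SeniorJudge".toList "senior_judge".toList (aRepl "ChiefJudge".toList "chief_judge".toList (aRepl "DistrictJudge".toList "district_judge".toList (ps))))))) = myT (p0 :: pMap altGetL ps) := by
    have := congrArg String.toList hAB
    simpa [String.toList_ofList] using this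
  have hXY := myT_inj (p0 :: aRepl "VisitingJudge".toList "visiting_judge".toList (aRepl "BankruptcyJudge".toList "bankruptcy_judge".toList (aRepl "MagistrateJudge".toList "magistrate_judge".toList (aRepl "SeniorJudge".toList "senior_judge".toList (aRepl "ChiefJudge".toList "chief_judge".toList (aRepl "DistrictJudge".toList "district_judge".toList (ps))))))) (p0 :: pMap altGetL ps)
    (by intro p hp
        rcases List.mem_cons.mp hp with rfl | hp
        · exact hp0
        · exact gfree6 p hp)
    (by intro p hp
        rcases List.mem_cons.mp hp with rfl | hp
        · exact hp0
        · exact hpfree p hp)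
    (by simp [length_aRepl, length_pMap]) hT
  exact ((List.cons.injEq _ _ _ _).mp hXY).2


theorem fix_judge_title_enums_spec' : ∀ (content : String),
    ¬ D_fix_judge_title_enums content →
    fix_judge_title_enums content = fix_judge_title_enums_alt content := by
  intro content hnd
  obtain ⟨p0, ps, hsp⟩ : ∃ p0 ps, mySplit content.toList = p0 :: ps := by
    cases hh : mySplit content.toList with
    | nil => exact absurd hh (mySplit_ne_nil content.toList)
    | cons a b => exact ⟨a, b, rfl⟩
  have hp0 : '"' ∉ p0 := mySplit_free content.toList p0 (by rw [hsp]; simp)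
  have hfree : ∀ p ∈ ps, '"' ∉ p := fun p hp => mySplit_free content.toList p (by rw [hsp]; exact List.mem_cons_of_mem _ hp)
  have hna := NA_of_notD content p0 ps hsp hnd
  have hcs : content.toList = myT (p0 :: ps) := by rw [← myT_mySplit content.toList, hsp]
  rw [A_chain, hcs, Aside p0 hp0 ps hfree hna, Bside content p0 ps hsp]

-- ===== VERDICT (by name: the statement is the Claim_ definition above) =====
theorem fix_judge_title_enums_spec : Claim_unchanged_fix_judge_title_enums := by
  intro content _hdom hnd
  exact fix_judge_title_enums_spec' content hnd

theorem fix_judge_title_enums_changed : Claim_changed_fix_judge_title_enums := by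
  unfold Claim_changed_fix_judge_title_enums; decide

theorem fix_judge_title_enums_tight : Claim_exact_fix_judge_title_enums := by
  intro content _hdom hd
  exact fix_judge_title_enums_tight' content hd
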